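-- pv_equiv track=rewrite | github.com/NoureldinYosri/competitive-programming | codeforces/1705/bf.py | bfs
-- ===== SOURCE A (Python) =====
-- def bfs(src, target):
--     D = {src: 0}
--     q = [src]
--     while len(q):
--         s = q.pop(0)
--         if s == target: return D[s]
--         d = D[s]
--         s = [c for c in s]
--         for i in range(1, len(s) - 1):
--             if s[i - 1] == s[i + 1]: continue
--             old = s[i]
--             s[i] = '1' if old == '0' else '0'
--             t = ''.join(s)
--             if t not in D:
--                 D[t] = d + 1
--                 q.append(t)
--             s[i] = old
--     return -1
-- ===== SOURCE B (Python) =====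
-- def bfs(src, target):
--     # Bellman-Ford-style relaxation to a fixpoint over the reachable state space,
--     # then a single lookup of the target's distance (no queue, no frontier).
--     dist = {src: 0}
--     changed = True
--     while changed:
--         changed = False
--         for s, d in list(dist.items()):
--             for i in range(1, len(s) - 1):
--                 if s[i - 1] != s[i + 1]:
--                     t = s[:i] + ('1' if s[i] == '0' else '0') + s[i + 1:]
--                     e = dist.get(t)
--                     if e is None or d + 1 < e:
--                         dist[t] = d + 1
--                         changed = True
--     return dist.get(target, -1)
-- ===== Notes on version B (the rewrite author's own statement) =====
-- stated objective: alternative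
-- what changed: Replaces A's breadth-first search (FIFO queue with pop(0) plus a distance dict) by a Bellman-Ford-style fixpoint relaxation: a distance dict is swept repeatedly, relaxing every flip-edge out of every known state, until a whole sweep changes nothing, and the answer is a single dict lookup of the target.
import Mathlib
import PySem

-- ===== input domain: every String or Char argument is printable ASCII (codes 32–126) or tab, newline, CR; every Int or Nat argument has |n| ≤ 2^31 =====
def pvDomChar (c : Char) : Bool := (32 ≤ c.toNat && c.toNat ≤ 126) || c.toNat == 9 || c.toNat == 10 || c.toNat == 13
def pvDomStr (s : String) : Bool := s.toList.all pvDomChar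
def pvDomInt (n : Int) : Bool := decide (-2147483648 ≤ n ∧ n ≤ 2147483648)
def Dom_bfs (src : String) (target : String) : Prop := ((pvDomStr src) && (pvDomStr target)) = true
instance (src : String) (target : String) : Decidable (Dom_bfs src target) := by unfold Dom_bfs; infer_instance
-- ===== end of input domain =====

-- B replaces A's breadth-first search (FIFO queue + distance dict) by a Bellman-Ford-style
-- relaxation: a distance dict is swept repeatedly (relaxing every edge out of every known state)
-- until a whole sweep changes nothing, then the target's distance is looked up; both return values
-- are proved equal to the shortest flip-distance.
-- Port A models Python strings by their character lists (an exact bijection), Python's dict by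
-- Std.HashMap: A's D is only ever read by key lookup / membership and extended, never iterated,
-- so a hash table is exact there (like CPython's own). Port B's dict IS iterated (items()), so it
-- is modelled by PySem.Dict (insertion order), per the type convention.
-- The states reachable by flip moves from a length-n string live in the finite set of length-n
-- strings over the source's characters plus '0','1'; that finite set serves only as the
-- termination measure of the loops (erased Prop invariants, never computed at run time).

-- ===== PORT A =====
-- termination scaffolding (ghost data): all length-n strings over alphabet A
def pvAllLists (A : Finset Char) : Nat → Finset (List Char)
  | 0 => {([] : List Char)}
  | n + 1 => (A ×ˢ pvAllLists A n).image (fun p => p.1 :: p.2)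

theorem pvMem_allLists (A : Finset Char) (n : Nat) (l : List Char) :
    l ∈ pvAllLists A n ↔ l.length = n ∧ ∀ c ∈ l, c ∈ A := by
  induction n generalizing l with
  | zero => cases l <;> simp [pvAllLists]
  | succ n ih =>
    cases l with
    | nil => simp [pvAllLists]
    | cons c cs => simp [pvAllLists, ih]; tauto

theorem pvNodup_len_le (S : Finset (List Char)) (l : List (List Char))
    (hnd : l.Nodup) (hsub : ∀ x ∈ l, x ∈ S) : l.length ≤ S.card :=
  (List.toFinset_card_of_nodup hnd) ▸
    Finset.card_le_card (fun x hx => hsub x (List.mem_toFinset.mp hx))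

theorem pvHM_size_le (S : Finset (List Char)) (m : Std.HashMap (List Char) Int)
    (h : ∀ k ∈ m.keys, k ∈ S) : m.size ≤ S.card := by
  have hnd : m.keys.Nodup :=
    (Std.HashMap.distinct_keys (m := m)).imp (fun hab => by simpa using hab)
  rw [← Std.HashMap.length_keys]
  exact pvNodup_len_le S _ hnd h

def pvAlpha (src : List Char) : Finset Char := insert '0' (insert '1' src.toFinset)

theorem pvSetD_mem_allLists (A : Finset Char) (n : Nat) (s : List Char) (i : Int) (c : Char)
    (hs : s ∈ pvAllLists A n) (hc : c ∈ A) : PySem.List.pySetD s i c ∈ pvAllLists A n := by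
  rw [pvMem_allLists] at hs ⊢
  refine ⟨by rw [PySem.List.length_pySetD]; exact hs.1, ?_⟩
  intro x hx
  unfold PySem.List.pySetD PySem.List.pySet? at hx
  cases h : PySem.List.pyIdx? s.length i with
  | none => rw [h] at hx; exact hs.2 x hx
  | some k =>
    rw [h] at hx
    rcases List.mem_or_eq_of_mem_set hx with h' | h'
    · exact hs.2 x h'
    · exact h' ▸ hc

-- in range, the slice-splice both programs build equals writing one character
theorem pvT_eq (s : List Char) (i : Int) (hi1 : 1 ≤ i) (hi2 : i < (s.length : Int) - 1)
    (c : Char) :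
    PySem.List.slice s none (some i) ++ [c] ++ PySem.List.slice s (some (i + 1)) none =
      PySem.List.pySetD s i c := by
  rw [PySem.List.slice_to s (show (0:Int) ≤ i by omega),
    PySem.List.slice_from s (show (0:Int) ≤ i + 1 by omega),
    PySem.List.pySetD_of_nonneg s c (show (0:Int) ≤ i by omega)]
  have hk : (i + 1).toNat = i.toNat + 1 := by omega
  have hlt : i.toNat < s.length := by omega
  rw [hk, List.set_eq_take_cons_drop c hlt]
  simp

-- A's inner 'for i in range(1, len(s)-1)' body (one index step / the whole range)
def pvStepA (s : List Char) (d : Int)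
    (st : Std.HashMap (List Char) Int × List (List Char)) (i : Int) :
    Std.HashMap (List Char) Int × List (List Char) :=
  if PySem.List.pyGetD s (i - 1) ' ' == PySem.List.pyGetD s (i + 1) ' ' then st
  else
    -- old := s[i]; t := ''.join(s with s[i] flipped)  (the flip is written back afterwards)
    if st.1.contains (PySem.List.pySetD s i
        (if PySem.List.pyGetD s i ' ' == '0' then '1' else '0')) then st
    else (st.1.insert (PySem.List.pySetD s i
        (if PySem.List.pyGetD s i ' ' == '0' then '1' else '0')) (d + 1),
      st.2 ++ [PySem.List.pySetD s i
        (if PySem.List.pyGetD s i ' ' == '0' then '1' else '0')])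

def pvInnerA (s : List Char) (d : Int)
    (st : Std.HashMap (List Char) Int × List (List Char)) :
    Std.HashMap (List Char) Int × List (List Char) :=
  (PySem.List.pyRange 1 (PySem.List.len s - 1) 1).foldl (pvStepA s d) st

-- loop invariant of A's while-loop, used only for termination (erased at run time)
def pvInvA (A : Finset Char) (n : Nat) (D : Std.HashMap (List Char) Int)
    (q : List (List Char)) : Prop :=
  ('0' ∈ A ∧ '1' ∈ A) ∧ (∀ k ∈ D.keys, k ∈ pvAllLists A n) ∧
    (∀ s ∈ q, s ∈ pvAllLists A n)

theorem pvStepA_cases (s : List Char) (d : Int)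
    (st : Std.HashMap (List Char) Int × List (List Char)) (i : Int) :
    pvStepA s d st i = st ∨
      (st.1.contains (PySem.List.pySetD s i
          (if PySem.List.pyGetD s i ' ' == '0' then '1' else '0')) = false ∧
        pvStepA s d st i = (st.1.insert (PySem.List.pySetD s i
            (if PySem.List.pyGetD s i ' ' == '0' then '1' else '0')) (d + 1),
          st.2 ++ [PySem.List.pySetD s i
            (if PySem.List.pyGetD s i ' ' == '0' then '1' else '0')])) := by
  unfold pvStepA
  split_ifs <;>
    first
      | exact Or.inl rfl
      | (rename_i hcon; exact Or.inr ⟨by simpa using hcon, rfl⟩)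

theorem pvStepA_fold_spec (A : Finset Char) (n : Nat) (s : List Char) (d : Int)
    (hs : s ∈ pvAllLists A n) (h0 : '0' ∈ A) (h1 : '1' ∈ A) :
    ∀ (is : List Int) (D : Std.HashMap (List Char) Int) (q : List (List Char)),
      (∀ k ∈ D.keys, k ∈ pvAllLists A n) →
      (∀ k ∈ (is.foldl (pvStepA s d) (D, q)).1.keys, k ∈ pvAllLists A n) ∧
      (∃ new, (is.foldl (pvStepA s d) (D, q)).2 = q ++ new ∧
        (∀ x ∈ new, x ∈ pvAllLists A n) ∧
        (∀ t ∈ new, (is.foldl (pvStepA s d) (D, q)).1[t]? = some (d + 1))) ∧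
      (∀ (t : List Char) (w : Int), D[t]? = some w → (is.foldl (pvStepA s d) (D, q)).1[t]? = some w) ∧
      (is.foldl (pvStepA s d) (D, q)).1.size + q.length =
        D.size + (is.foldl (pvStepA s d) (D, q)).2.length := by
  intro is
  induction is with
  | nil =>
    intro D q hkeys
    exact ⟨hkeys, ⟨[], by simp, by simp, by simp⟩, fun t w hw => hw, by simp⟩
  | cons i is ih =>
    intro D q hkeys
    simp only [List.foldl_cons]
    rcases pvStepA_cases s d (D, q) i with hcase | ⟨hfresh, hcase⟩
    · rw [hcase]; exact ih D q hkeys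
    · rw [hcase]
      dsimp only
      have hcA : (if PySem.List.pyGetD s i ' ' == '0' then '1' else '0') ∈ A := by
        split_ifs <;> [exact h1; exact h0]
      have htS : PySem.List.pySetD s i
          (if PySem.List.pyGetD s i ' ' == '0' then '1' else '0') ∈ pvAllLists A n :=
        pvSetD_mem_allLists A n s i _ hs hcA
      set t0 := PySem.List.pySetD s i
        (if PySem.List.pyGetD s i ' ' == '0' then '1' else '0') with ht0
      have hnotmem : t0 ∉ D := fun hm =>
        by rw [Std.HashMap.mem_iff_contains.mp hm] at hfresh; cases hfresh
      have hkeys1 : ∀ k ∈ (D.insert t0 (d + 1)).keys, k ∈ pvAllLists A n := by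
        intro k hk
        rcases Std.HashMap.mem_insert.mp (Std.HashMap.mem_keys.mp hk) with h' | h'
        · exact (beq_iff_eq.mp h') ▸ htS
        · exact hkeys k (Std.HashMap.mem_keys.mpr h')
      obtain ⟨hk', ⟨new', hq', hS', hval'⟩, hpres', hcount'⟩ :=
        ih (D.insert t0 (d + 1)) (q ++ [t0]) hkeys1
      have hfreshget : D[t0]? = none := by
        have hiso : D[t0]?.isSome = false := by
          rw [← Std.HashMap.contains_eq_isSome_getElem?]; exact hfresh
        cases hg : D[t0]? with
        | none => rfl
        | some w => rw [hg] at hiso; cases hiso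
      have hpres0 : ∀ (t : List Char) (w : Int), D[t]? = some w →
          (is.foldl (pvStepA s d) (D.insert t0 (d + 1), q ++ [t0])).1[t]? = some w := by
        intro t w hw
        have hne : (t0 == t) = false := beq_eq_false_iff_ne.mpr
          (fun he => by rw [← he, hfreshget] at hw; cases hw)
        refine hpres' t w ?_
        rw [Std.HashMap.getElem?_insert, if_neg (by rw [hne]; exact Bool.false_ne_true)]
        exact hw
      refine ⟨hk', ⟨t0 :: new', ?_, ?_, ?_⟩, hpres0, ?_⟩
      · rw [hq']; simp
      · intro x hx
        rcases List.mem_cons.mp hx with h' | h'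
        · exact h' ▸ htS
        · exact hS' x h'
      · intro t ht
        rcases List.mem_cons.mp ht with h' | h'
        · exact h' ▸ hpres' t0 (d + 1) Std.HashMap.getElem?_insert_self
        · exact hval' t h'
      · have hlen1 : (D.insert t0 (d + 1)).size = D.size + 1 := by
          rw [Std.HashMap.size_insert, if_neg hnotmem]
        rw [hlen1] at hcount'
        simp only [List.length_append, List.length_cons, List.length_nil] at hcount'
        omega

theorem pvInvA_step (A : Finset Char) (n : Nat) (s : List Char) (d : Int)
    (D : Std.HashMap (List Char) Int) (rest : List (List Char))
    (h : pvInvA A n D (s :: rest)) :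
    pvInvA A n (pvInnerA s d (D, rest)).1 (pvInnerA s d (D, rest)).2 := by
  obtain ⟨⟨h0, h1⟩, hkeys, hq⟩ := h
  obtain ⟨hk', ⟨new, hq', hnewS, _⟩, _, _⟩ :=
    pvStepA_fold_spec A n s d (hq s (by simp)) h0 h1
      (PySem.List.pyRange 1 (PySem.List.len s - 1) 1) D rest hkeys
  refine ⟨⟨h0, h1⟩, hk', ?_⟩
  rw [show (pvInnerA s d (D, rest)).2 = rest ++ new from hq']
  intro x hx
  rcases List.mem_append.mp hx with h' | h'
  · exact hq x (by simp [h'])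
  · exact hnewS x h'

theorem pvInnerA_dec (A : Finset Char) (n : Nat) (s : List Char) (d : Int)
    (D : Std.HashMap (List Char) Int) (rest : List (List Char))
    (h : pvInvA A n D (s :: rest)) :
    2 * ((pvAllLists A n).card - (pvInnerA s d (D, rest)).1.size) +
      (pvInnerA s d (D, rest)).2.length
    < 2 * ((pvAllLists A n).card - D.size) + (s :: rest).length := by
  obtain ⟨⟨h0, h1⟩, hkeys, hq⟩ := h
  obtain ⟨hk', ⟨new, hq', _, _⟩, _, hcount⟩ :=
    pvStepA_fold_spec A n s d (hq s (by simp)) h0 h1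
      (PySem.List.pyRange 1 (PySem.List.len s - 1) 1) D rest hkeys
  simp only [pvInnerA]
  set P := (PySem.List.pyRange 1 (PySem.List.len s - 1) 1).foldl (pvStepA s d) (D, rest)
    with hP
  have hb : P.1.size ≤ (pvAllLists A n).card := pvHM_size_le _ _ hk'
  have hql : P.2.length = rest.length + new.length := by rw [hq']; simp
  simp only [List.length_cons]
  omega

def pvLoopA (target : List Char) (A : Finset Char) (n : Nat) :
    (D : Std.HashMap (List Char) Int) → (q : List (List Char)) →
    pvInvA A n D q → Int
  | _, [], _ => -1
  | D, s :: rest, h =>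
    if s == target then D.getD s 0            -- Python: return D[s]; s is always a key of D
    else
      pvLoopA target A n (pvInnerA s (D.getD s 0) (D, rest)).1
        (pvInnerA s (D.getD s 0) (D, rest)).2
        (pvInvA_step A n s (D.getD s 0) D rest h)
  termination_by D q _ => 2 * ((pvAllLists A n).card - D.size) + q.length
  decreasing_by exact pvInnerA_dec A n s (D.getD s 0) D rest h

theorem pvInitA (l : List Char) :
    pvInvA (pvAlpha l) l.length ((∅ : Std.HashMap (List Char) Int).insert l 0) [l] := by
  have hmem : l ∈ pvAllLists (pvAlpha l) l.length := by
    rw [pvMem_allLists]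
    exact ⟨rfl, fun c hc => by simp [pvAlpha, List.mem_toFinset.mpr hc]⟩
  refine ⟨⟨by simp [pvAlpha], by simp [pvAlpha]⟩, ?_, ?_⟩
  · intro k hk
    rcases Std.HashMap.mem_insert.mp (Std.HashMap.mem_keys.mp hk) with h' | h'
    · exact (beq_iff_eq.mp h') ▸ hmem
    · exact absurd h' (Std.HashMap.not_mem_empty)
  · intro x hx; simp at hx; exact hx ▸ hmem

-- port of A: states are the strings' character lists (str ↔ List Char is a bijection; all
-- indexing below is within range, so the total pyGetD/pySetD forms are exact)
def bfs (src : String) (target : String) : Int :=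
  pvLoopA target.toList (pvAlpha src.toList) src.toList.length
    ((∅ : Std.HashMap (List Char) Int).insert src.toList 0) [src.toList] (pvInitA src.toList)

-- ===== PORT B =====
-- t = s[:i] + flipped char + s[i+1:]
def pvFlip (s : List Char) (i : Int) : List Char :=
  PySem.List.slice s none (some i) ++
    [if PySem.List.pyGetD s i ' ' == '0' then '1' else '0'] ++
    PySem.List.slice s (some (i + 1)) none

-- body of B's innermost loop: relax the edge s -> s-with-s[i]-flipped
def pvRelaxI (s : List Char) (d : Int)
    (st : PySem.Dict (List Char) Int × Bool) (i : Int) :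
    PySem.Dict (List Char) Int × Bool :=
  if !(PySem.List.pyGetD s (i - 1) ' ' == PySem.List.pyGetD s (i + 1) ' ') then
    match st.1.get? (pvFlip s i) with
    | none => (st.1.insert (pvFlip s i) (d + 1), true)
    | some e => if d + 1 < e then (st.1.insert (pvFlip s i) (d + 1), true) else st
  else st

-- one snapshot item (s, d): relax all its out-edges
def pvPassStep (st : PySem.Dict (List Char) Int × Bool) (p : List Char × Int) :
    PySem.Dict (List Char) Int × Bool :=
  (PySem.List.pyRange 1 (PySem.List.len p.1 - 1) 1).foldl (pvRelaxI p.1 p.2) st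

-- one whole sweep over list(dist.items()), starting with changed = False
def pvPass (D : PySem.Dict (List Char) Int) : PySem.Dict (List Char) Int × Bool :=
  D.items.foldl pvPassStep (D, false)

-- loop invariant of B's while-loop, used only for termination (erased at run time)
def pvInvR (A : Finset Char) (n : Nat) (D : PySem.Dict (List Char) Int) : Prop :=
  D.keys.Nodup ∧ ('0' ∈ A ∧ '1' ∈ A) ∧
    ∀ p ∈ D.items, p.1 ∈ pvAllLists A n ∧ 0 ≤ p.2 ∧ p.2 ≤ (D.items.length : Int)

def pvSum (D : PySem.Dict (List Char) Int) : Nat :=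
  (D.items.map (fun p => p.2.toNat)).sum

-- termination measure: fewer undiscovered states first, then smaller total of the distances
def pvNu (A : Finset Char) (n : Nat) (D : PySem.Dict (List Char) Int) : Nat :=
  ((pvAllLists A n).card + 1 - D.items.length) *
      ((pvAllLists A n).card * (pvAllLists A n).card + 1) + pvSum D

theorem pvRelaxI_cases (s : List Char) (d : Int)
    (st : PySem.Dict (List Char) Int × Bool) (i : Int)
    (hi1 : 1 ≤ i) (hi2 : i < (s.length : Int) - 1) :
    pvRelaxI s d st i = st ∨
      ((st.1.get? (PySem.List.pySetD s i
          (if PySem.List.pyGetD s i ' ' == '0' then '1' else '0')) = none ∨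
        ∃ e, st.1.get? (PySem.List.pySetD s i
          (if PySem.List.pyGetD s i ' ' == '0' then '1' else '0')) = some e ∧ d + 1 < e) ∧
       ¬ (PySem.List.pyGetD s (i - 1) ' ' = PySem.List.pyGetD s (i + 1) ' ') ∧
        pvRelaxI s d st i = (st.1.insert (PySem.List.pySetD s i
          (if PySem.List.pyGetD s i ' ' == '0' then '1' else '0')) (d + 1), true)) := by
  have ht : pvFlip s i = PySem.List.pySetD s i
      (if PySem.List.pyGetD s i ' ' == '0' then '1' else '0') := pvT_eq s i hi1 hi2 _
  unfold pvRelaxI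
  rw [ht]
  by_cases hg : PySem.List.pyGetD s (i - 1) ' ' = PySem.List.pyGetD s (i + 1) ' '
  · rw [if_neg (by simp [hg])]
    exact Or.inl rfl
  · rw [if_pos (by simp [hg])]
    cases hget : st.1.get? (PySem.List.pySetD s i
        (if PySem.List.pyGetD s i ' ' == '0' then '1' else '0')) with
    | none => exact Or.inr ⟨Or.inl rfl, hg, rfl⟩
    | some e =>
      dsimp only
      by_cases hlt : d + 1 < e
      · rw [if_pos hlt]; exact Or.inr ⟨Or.inr ⟨e, rfl, hlt⟩, hg, rfl⟩
      · rw [if_neg hlt]; exact Or.inl rfl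

-- replacing the (unique) entry at key k by value v moves the sum by v - e
theorem pvSum_replace (l : List (List Char × Int)) (k : List Char) (v e : Int)
    (hnd : (l.map Prod.fst).Nodup) (hmem : (k, e) ∈ l) :
    ((l.map (fun p => if (p.1 == k) = true then (k, v) else p)).map
        (fun p => p.2.toNat)).sum + e.toNat
      = (l.map (fun p => p.2.toNat)).sum + v.toNat := by
  induction l with
  | nil => simp at hmem
  | cons p rest ih =>
    simp only [List.map_cons, List.nodup_cons, List.mem_map] at hnd
    by_cases hpk : (p.1 == k) = true
    · have hpe : p = (k, e) := by
        rcases List.mem_cons.mp hmem with h' | h'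
        · exact h'.symm
        · exfalso
          exact hnd.1 ⟨(k, e), h', by simpa using (beq_iff_eq.mp hpk).symm⟩
      have hrest : rest.map (fun p => if (p.1 == k) = true then (k, v) else p) = rest := by
        have hcg : ∀ q ∈ rest, (if (q.1 == k) = true then (k, v) else q) = q := by
          intro q hq
          have : ¬ (q.1 == k) = true := by
            intro hqk
            exact hnd.1 ⟨q, hq, by rw [beq_iff_eq.mp hqk, ← beq_iff_eq.mp hpk]⟩
          rw [if_neg this]
        rw [List.map_congr_left hcg, List.map_id']
      subst hpe
      simp only [List.map_cons, List.sum_cons, hrest, if_pos hpk]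
      omega
    · have hmem' : (k, e) ∈ rest := by
        rcases List.mem_cons.mp hmem with h' | h'
        · exact absurd (by rw [← h']; simp) hpk
        · exact h'
      simp only [List.map_cons, if_neg hpk, List.sum_cons]
      have := ih hnd.2 hmem'
      omega

-- keys are untouched by a relaxation sweep step
theorem pvKeys_map_replace (l : List (List Char × Int)) (k : List Char) (v : Int) :
    (l.map (fun p => if (p.1 == k) = true then (k, v) else p)).map Prod.fst =
      l.map Prod.fst := by
  rw [List.map_map]
  apply List.map_congr_left
  intro q _
  by_cases h : q.1 = k
  · simp [h]
  · simp [h]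

-- 'one step of a sweep is sound': invariants kept, and any change strictly shrinks the measure
def pvOK (A : Finset Char) (n : Nat) (L0 : Nat)
    (st st' : PySem.Dict (List Char) Int × Bool) : Prop :=
  (pvInvR A n st.1 ∧ L0 ≤ st.1.items.length) →
    (pvInvR A n st'.1 ∧ L0 ≤ st'.1.items.length ∧
      (st' = st ∨ (st'.2 = true ∧ pvNu A n st'.1 < pvNu A n st.1)))

theorem pvOK_trans (A : Finset Char) (n : Nat) (L0 : Nat)
    (st st' st'' : PySem.Dict (List Char) Int × Bool)
    (h1 : pvOK A n L0 st st') (h2 : pvOK A n L0 st' st'') : pvOK A n L0 st st'' := by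
  intro h
  obtain ⟨hi1, hl1, hc1⟩ := h1 h
  obtain ⟨hi2, hl2, hc2⟩ := h2 ⟨hi1, hl1⟩
  refine ⟨hi2, hl2, ?_⟩
  rcases hc1 with he1 | ⟨hf1, hm1⟩
  · rw [he1] at hc2; exact hc2
  · rcases hc2 with he2 | ⟨hf2, hm2⟩
    · rw [he2]; exact Or.inr ⟨hf1, hm1⟩
    · exact Or.inr ⟨hf2, lt_trans hm2 hm1⟩

theorem pvRelaxI_OK (A : Finset Char) (n : Nat) (L0 : Nat) (s : List Char) (d : Int)
    (hs : s ∈ pvAllLists A n) (hd0 : 0 ≤ d) (hdL : d ≤ (L0 : Int))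
    (st : PySem.Dict (List Char) Int × Bool) (i : Int)
    (hi1 : 1 ≤ i) (hi2 : i < (s.length : Int) - 1) :
    pvOK A n L0 st (pvRelaxI s d st i) := by
  intro hpre
  obtain ⟨hinv, hL⟩ := hpre
  rcases pvRelaxI_cases s d st i hi1 hi2 with hid | ⟨hcond, _, heq⟩
  · rw [hid]; exact ⟨hinv, hL, Or.inl rfl⟩
  · obtain ⟨hnd, hA01, hvals⟩ := hinv
    set t := PySem.List.pySetD s i
      (if PySem.List.pyGetD s i ' ' == '0' then '1' else '0') with htdef
    have htU : t ∈ pvAllLists A n := by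
      apply pvSetD_mem_allLists A n s i _ hs
      split_ifs
      · exact hA01.2
      · exact hA01.1
    rw [heq]
    rcases hcond with hnone | ⟨e, hsome, hlt⟩
    · -- fresh key: the dict grows by one entry
      have hcont : st.1.contains t = false :=
        (PySem.Dict.get?_eq_none_iff_contains st.1 t).mp hnone
      have hitems : (st.1.insert t (d + 1)).items = st.1.items ++ [(t, d + 1)] :=
        PySem.Dict.items_insert_of_not_contains st.1 (d + 1) hcont
      have hnd' : (st.1.insert t (d + 1)).keys.Nodup :=
        PySem.Dict.nodup_keys_insert st.1 t (d + 1) hnd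
      have hlen' : (st.1.insert t (d + 1)).items.length = st.1.items.length + 1 := by
        rw [hitems]; simp
      have hinv' : pvInvR A n (st.1.insert t (d + 1)) := by
        refine ⟨hnd', hA01, ?_⟩
        intro p hp
        rw [hitems] at hp
        rw [hlen']
        rcases List.mem_append.mp hp with h' | h'
        · obtain ⟨hU, h0, hle⟩ := hvals p h'
          exact ⟨hU, h0, by push_cast; omega⟩
        · simp at h'
          rw [h']
        -- new value d + 1: nonnegative and bounded by the new number of entries
          refine ⟨htU, by omega, ?_⟩
          push_cast
          omega
      refine ⟨hinv', by rw [hlen']; omega, Or.inr ⟨rfl, ?_⟩⟩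
      -- the measure drops: one more state discovered
      have hsub : ∀ k ∈ (st.1.insert t (d + 1)).keys, k ∈ pvAllLists A n := by
        intro k hk
        have : k ∈ (st.1.insert t (d + 1)).items.map Prod.fst := hk
        obtain ⟨p, hp, hpk⟩ := List.mem_map.mp this
        rw [hitems] at hp
        rcases List.mem_append.mp hp with h' | h'
        · exact hpk ▸ (hvals p h').1
        · simp at h'
          rw [← hpk, h']
          exact htU
      have hlenC : (st.1.insert t (d + 1)).items.length ≤ (pvAllLists A n).card := by
        have := pvNodup_len_le (pvAllLists A n) (st.1.insert t (d + 1)).keys hnd' hsub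
        simpa [PySem.Dict.keys] using this
      rw [hlen'] at hlenC
      have hsum' : pvSum (st.1.insert t (d + 1)) = pvSum st.1 + (d + 1).toNat := by
        unfold pvSum
        rw [hitems]
        simp
      have hdlen : (d + 1).toNat ≤ st.1.items.length + 1 := by omega
      unfold pvNu
      rw [hlen', hsum']
      set C := (pvAllLists A n).card with hC
      set K := C * C + 1 with hK
      have hCC : C ≤ C * C := by nlinarith
      have hxK : (d + 1).toNat < K := by omega
      have hsplit : C + 1 - st.1.items.length = (C + 1 - (st.1.items.length + 1)) + 1 := by
        omega
      rw [hsplit, Nat.add_mul, one_mul]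
      omega
    · -- improvement: same keys, one distance strictly smaller
      have hcont : st.1.contains t = true := by
        rw [PySem.Dict.contains_eq_isSome_get?, hsome]; rfl
      have hitems : (st.1.insert t (d + 1)).items =
          st.1.items.map (fun p => if (p.1 == t) = true then (t, d + 1) else p) :=
        PySem.Dict.items_insert_of_contains st.1 (d + 1) hcont
      have hmemte : (t, e) ∈ st.1.items := PySem.Dict.mem_items_of_get?_eq_some st.1 hsome
      have hkeys' : (st.1.insert t (d + 1)).keys = st.1.keys := by
        show (st.1.insert t (d + 1)).items.map Prod.fst = st.1.items.map Prod.fst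
        rw [hitems]
        exact pvKeys_map_replace st.1.items t (d + 1)
      have hlen' : (st.1.insert t (d + 1)).items.length = st.1.items.length := by
        have : (st.1.insert t (d + 1)).items.map Prod.fst =
            st.1.items.map Prod.fst := hkeys'
        have hl := congrArg List.length this
        simpa using hl
      have hebound := hvals (t, e) hmemte
      have hinv' : pvInvR A n (st.1.insert t (d + 1)) := by
        refine ⟨by rw [hkeys']; exact hnd, hA01, ?_⟩
        intro p hp
        rw [hitems] at hp
        rw [hlen']
        obtain ⟨q, hq, hpq⟩ := List.mem_map.mp hp
        by_cases hqt : (q.1 == t) = true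
        · rw [if_pos hqt] at hpq
          rw [← hpq]
          exact ⟨htU, by omega, by have := hebound.2.2; omega⟩
        · rw [if_neg hqt] at hpq
          exact hpq ▸ hvals q hq
      have hsum : pvSum (st.1.insert t (d + 1)) + e.toNat = pvSum st.1 + (d + 1).toNat := by
        unfold pvSum
        rw [hitems]
        exact pvSum_replace st.1.items t (d + 1) e hnd hmemte
      refine ⟨hinv', by rw [hlen']; omega, Or.inr ⟨rfl, ?_⟩⟩
      show pvNu A n (st.1.insert t (d + 1)) < pvNu A n st.1
      unfold pvNu
      rw [hlen']
      have h0e : 0 ≤ e := hebound.2.1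
      have : (d + 1).toNat < e.toNat := by omega
      omega

theorem pvFoldl_OK {β : Type} (A : Finset Char) (n : Nat) (L0 : Nat)
    (f : (PySem.Dict (List Char) Int × Bool) → β → (PySem.Dict (List Char) Int × Bool))
    (l : List β) (h : ∀ st, ∀ x ∈ l, pvOK A n L0 st (f st x)) :
    ∀ st, pvOK A n L0 st (l.foldl f st) := by
  induction l with
  | nil => intro st hst; exact ⟨hst.1, hst.2, Or.inl rfl⟩
  | cons x xs ih =>
    intro st
    simp only [List.foldl_cons]
    exact pvOK_trans A n L0 st (f st x) _ (h st x (by simp))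
      (ih (fun st' y hy => h st' y (by simp [hy])) (f st x))

theorem pvPass_OK (A : Finset Char) (n : Nat) (D : PySem.Dict (List Char) Int)
    (h : pvInvR A n D) : pvOK A n D.items.length (D, false) (pvPass D) := by
  apply pvFoldl_OK
  intro st p hp
  unfold pvPassStep
  apply pvFoldl_OK
  intro st' i hi
  rw [PySem.List.len_eq] at hi
  obtain ⟨hi1, hi2⟩ := PySem.List.mem_pyRange_one.mp hi
  obtain ⟨hU, hd0, hdL⟩ := h.2.2 p hp
  exact pvRelaxI_OK A n D.items.length p.1 p.2 hU hd0 hdL st' i hi1 hi2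

theorem pvPass_inv (A : Finset Char) (n : Nat) (D : PySem.Dict (List Char) Int)
    (h : pvInvR A n D) : pvInvR A n (pvPass D).1 :=
  (pvPass_OK A n D h ⟨h, le_refl _⟩).1

theorem pvPass_dec (A : Finset Char) (n : Nat) (D : PySem.Dict (List Char) Int)
    (h : pvInvR A n D) (hc : (pvPass D).2 = true) :
    pvNu A n (pvPass D).1 < pvNu A n D := by
  obtain ⟨_, _, hcase⟩ := pvPass_OK A n D h ⟨h, le_refl _⟩
  rcases hcase with he | ⟨_, hm⟩
  · rw [he] at hc; cases hc
  · exact hm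

-- B's 'while changed' loop: sweep; if something changed sweep again, else look the target up
def pvLoopR (target : List Char) (A : Finset Char) (n : Nat) :
    (D : PySem.Dict (List Char) Int) → pvInvR A n D → Int
  | D, h =>
    if hc : (pvPass D).2 = true then
      pvLoopR target A n (pvPass D).1 (pvPass_inv A n D h)
    else (pvPass D).1.getD target (-1)
  termination_by D _ => pvNu A n D
  decreasing_by exact pvPass_dec A n D h hc

theorem pvInitR (l : List Char) :
    pvInvR (pvAlpha l) l.length
      ((PySem.Dict.empty : PySem.Dict (List Char) Int).insert l 0) := by
  have hmem : l ∈ pvAllLists (pvAlpha l) l.length := by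
    rw [pvMem_allLists]
    exact ⟨rfl, fun c hc => by simp [pvAlpha, List.mem_toFinset.mpr hc]⟩
  have hitems : ((PySem.Dict.empty : PySem.Dict (List Char) Int).insert l 0).items
      = [(l, 0)] := by
    rw [PySem.Dict.items_insert_of_not_contains _ _ (by simp [PySem.Dict.contains_empty])]
    rfl
  refine ⟨?_, ⟨by simp [pvAlpha], by simp [pvAlpha]⟩, ?_⟩
  · unfold PySem.Dict.keys
    rw [hitems]; simp
  · intro p hp
    rw [hitems] at hp
    simp at hp
    rw [hitems, hp]
    exact ⟨hmem, by omega, by simp⟩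

-- port of B (same string modelling; dist = {src: 0} is insert into the empty dict)
def bfs_alt (src : String) (target : String) : Int :=
  pvLoopR target.toList (pvAlpha src.toList) src.toList.length
    ((PySem.Dict.empty : PySem.Dict (List Char) Int).insert src.toList 0)
    (pvInitR src.toList)

-- ===== PRECONDITION & SPEC =====
def Spec_bfs (src : String) (target : String) (out : Int) : Prop := out = bfs_alt src target
instance (src : String) (target : String) (out : Int) : Decidable (Spec_bfs src target out) := by unfold Spec_bfs; infer_instance

-- ===== CLAIM (what is proved, stated in full; the proofs are below) =====
def Claim_equal_bfs : Prop := ∀ (src : String) (target : String), Dom_bfs src target → Spec_bfs src target (bfs src target)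

-- ===== LEMMAS AND PROOFS =====

-- ===== internal: A's queue BFS consumed level by level (proof-only; not a port) =====
theorem pvHS_size_le (S : Finset (List Char)) (m : Std.HashSet (List Char))
    (h : ∀ k ∈ m, k ∈ S) : m.size ≤ S.card := by
  have hnd : m.toList.Nodup :=
    (Std.HashSet.distinct_toList (m := m)).imp (fun hab => by simpa using hab)
  rw [← Std.HashSet.length_toList]
  exact pvNodup_len_le S _ hnd (fun x hx => h x (Std.HashSet.mem_toList.mp hx))

def pvStepB (s : List Char)
    (st : Std.HashSet (List Char) × List (List Char)) (i : Int) :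
    Std.HashSet (List Char) × List (List Char) :=
  if !(PySem.List.pyGetD s (i - 1) ' ' == PySem.List.pyGetD s (i + 1) ' ') then
    if st.1.contains (PySem.List.slice s none (some i) ++
        [if PySem.List.pyGetD s i ' ' == '0' then '1' else '0'] ++
        PySem.List.slice s (some (i + 1)) none) then st
    else (st.1.insert (PySem.List.slice s none (some i) ++
        [if PySem.List.pyGetD s i ' ' == '0' then '1' else '0'] ++
        PySem.List.slice s (some (i + 1)) none),
      st.2 ++ [PySem.List.slice s none (some i) ++
        [if PySem.List.pyGetD s i ' ' == '0' then '1' else '0'] ++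
        PySem.List.slice s (some (i + 1)) none])
  else st

def pvNbrB (s : List Char) (st : Std.HashSet (List Char) × List (List Char)) :
    Std.HashSet (List Char) × List (List Char) :=
  (PySem.List.pyRange 1 (PySem.List.len s - 1) 1).foldl (pvStepB s) st

def pvExpandB (v : Std.HashSet (List Char)) (fr : List (List Char)) :
    Std.HashSet (List Char) × List (List Char) :=
  fr.foldl (fun st s => pvNbrB s st) (v, [])

def pvInvB (A : Finset Char) (n : Nat) (v : Std.HashSet (List Char))
    (fr : List (List Char)) : Prop :=
  ('0' ∈ A ∧ '1' ∈ A) ∧ (∀ k ∈ v, k ∈ pvAllLists A n) ∧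
    (∀ s ∈ fr, s ∈ pvAllLists A n)

theorem pvStepB_cases (s : List Char)
    (st : Std.HashSet (List Char) × List (List Char)) (i : Int)
    (hi1 : 1 ≤ i) (hi2 : i < (s.length : Int) - 1) :
    pvStepB s st i = st ∨
      (st.1.contains (PySem.List.pySetD s i
          (if PySem.List.pyGetD s i ' ' == '0' then '1' else '0')) = false ∧
        pvStepB s st i = (st.1.insert (PySem.List.pySetD s i
            (if PySem.List.pyGetD s i ' ' == '0' then '1' else '0')),
          st.2 ++ [PySem.List.pySetD s i
            (if PySem.List.pyGetD s i ' ' == '0' then '1' else '0')])) := by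
  unfold pvStepB
  rw [pvT_eq s i hi1 hi2]
  split_ifs <;>
    first
      | exact Or.inl rfl
      | (rename_i hcon; exact Or.inr ⟨by simpa using hcon, rfl⟩)

theorem pvNbrB_fold_spec (A : Finset Char) (n : Nat) (s : List Char)
    (hs : s ∈ pvAllLists A n) (h0 : '0' ∈ A) (h1 : '1' ∈ A) :
    ∀ (is : List Int), (∀ i ∈ is, 1 ≤ i ∧ i < (s.length : Int) - 1) →
    ∀ (v : Std.HashSet (List Char)) (nxt : List (List Char)),
      ∃ new, (is.foldl (pvStepB s) (v, nxt)).2 = nxt ++ new ∧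
        (∀ x ∈ new, x ∈ pvAllLists A n) ∧
        (∀ k ∈ (is.foldl (pvStepB s) (v, nxt)).1, k ∈ v ∨ k ∈ new) ∧
        (is.foldl (pvStepB s) (v, nxt)).1.size = v.size + new.length := by
  intro is
  induction is with
  | nil =>
    intro _ v nxt
    exact ⟨[], by simp, by simp, fun k hk => Or.inl hk, by simp⟩
  | cons i is ih =>
    intro hrange v nxt
    obtain ⟨hi1, hi2⟩ := hrange i (by simp)
    simp only [List.foldl_cons]
    rcases pvStepB_cases s (v, nxt) i hi1 hi2 with hcase | ⟨hfresh, hcase⟩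
    · rw [hcase]
      exact ih (fun j hj => hrange j (by simp [hj])) v nxt
    · rw [hcase]
      dsimp only at hfresh ⊢
      have hcA : (if PySem.List.pyGetD s i ' ' == '0' then '1' else '0') ∈ A := by
        split_ifs <;> [exact h1; exact h0]
      set t0 := PySem.List.pySetD s i
        (if PySem.List.pyGetD s i ' ' == '0' then '1' else '0') with ht0
      have htS : t0 ∈ pvAllLists A n := pvSetD_mem_allLists A n s i _ hs hcA
      have hnotmem : t0 ∉ v := fun hm =>
        by rw [Std.HashSet.mem_iff_contains.mp hm] at hfresh; cases hfresh
      obtain ⟨new2, heq2, hS2, hmem2, hsz2⟩ :=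
        ih (fun j hj => hrange j (by simp [hj])) (v.insert t0) (nxt ++ [t0])
      refine ⟨t0 :: new2, ?_, ?_, ?_, ?_⟩
      · rw [heq2]; simp
      · intro x hx
        rcases List.mem_cons.mp hx with hx2 | hx2
        · exact hx2 ▸ htS
        · exact hS2 x hx2
      · intro k hk
        rcases hmem2 k hk with hk2 | hk2
        · rcases Std.HashSet.mem_insert.mp hk2 with hk3 | hk3
          · exact Or.inr (by simp [beq_iff_eq.mp hk3])
          · exact Or.inl hk3
        · exact Or.inr (by simp [hk2])
      · rw [hsz2, Std.HashSet.size_insert, if_neg hnotmem]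
        simp only [List.length_cons]
        omega

theorem pvExpandB_fold_spec (A : Finset Char) (n : Nat) (h0 : '0' ∈ A) (h1 : '1' ∈ A) :
    ∀ (fr : List (List Char)) (v : Std.HashSet (List Char)) (nxt : List (List Char)),
      (∀ s ∈ fr, s ∈ pvAllLists A n) →
      ∃ new, (fr.foldl (fun st s => pvNbrB s st) (v, nxt)).2 = nxt ++ new ∧
        (∀ x ∈ new, x ∈ pvAllLists A n) ∧
        (∀ k ∈ (fr.foldl (fun st s => pvNbrB s st) (v, nxt)).1, k ∈ v ∨ k ∈ new) ∧
        (fr.foldl (fun st s => pvNbrB s st) (v, nxt)).1.size = v.size + new.length := by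
  intro fr
  induction fr with
  | nil =>
    intro v nxt _
    exact ⟨[], by simp, by simp, fun k hk => Or.inl hk, by simp⟩
  | cons f fr ih =>
    intro v nxt hfr
    simp only [List.foldl_cons]
    have hrange : ∀ i ∈ PySem.List.pyRange 1 (PySem.List.len f - 1) 1,
        1 ≤ i ∧ i < (f.length : Int) - 1 := by
      intro i hi
      rw [PySem.List.len_eq] at hi
      exact PySem.List.mem_pyRange_one.mp hi
    obtain ⟨new1, heq1, hS1, hmem1, hsz1⟩ :=
      pvNbrB_fold_spec A n f (hfr f (by simp)) h0 h1 _ hrange v nxt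
    have heq1' : (pvNbrB f (v, nxt)).2 = nxt ++ new1 := heq1
    have hmem1' : ∀ k ∈ (pvNbrB f (v, nxt)).1, k ∈ v ∨ k ∈ new1 := hmem1
    have hsz1' : (pvNbrB f (v, nxt)).1.size = v.size + new1.length := hsz1
    have hsplit : pvNbrB f (v, nxt) = ((pvNbrB f (v, nxt)).1, nxt ++ new1) := by
      rw [← heq1']
    rw [hsplit]
    obtain ⟨new2, heq2, hS2, hmem2, hsz2⟩ :=
      ih (pvNbrB f (v, nxt)).1 (nxt ++ new1) (fun x hx => hfr x (by simp [hx]))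
    refine ⟨new1 ++ new2, ?_, ?_, ?_, ?_⟩
    · rw [heq2]; simp
    · intro x hx
      rcases List.mem_append.mp hx with hx2 | hx2
      · exact hS1 x hx2
      · exact hS2 x hx2
    · intro k hk
      rcases hmem2 k hk with hk2 | hk2
      · rcases hmem1' k hk2 with hk3 | hk3
        · exact Or.inl hk3
        · exact Or.inr (by simp [hk3])
      · exact Or.inr (by simp [hk2])
    · rw [hsz2, hsz1']; simp only [List.length_append]; omega

theorem pvInvB_step (A : Finset Char) (n : Nat) (v : Std.HashSet (List Char))
    (f : List Char) (rest : List (List Char)) (h : pvInvB A n v (f :: rest)) :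
    pvInvB A n (pvExpandB v (f :: rest)).1 (pvExpandB v (f :: rest)).2 := by
  obtain ⟨⟨h0, h1⟩, hv, hf⟩ := h
  obtain ⟨new, heq, hS, hmem, _⟩ := pvExpandB_fold_spec A n h0 h1 (f :: rest) v [] hf
  refine ⟨⟨h0, h1⟩, ?_, ?_⟩
  · intro k hk
    rcases hmem k hk with h' | h'
    · exact hv k h'
    · exact hS k h'
  · rw [show (pvExpandB v (f :: rest)).2 = new from by rw [pvExpandB, heq]; rfl]
    exact hS

theorem pvExpandB_dec (A : Finset Char) (n : Nat) (v : Std.HashSet (List Char))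
    (f : List Char) (rest : List (List Char)) (h : pvInvB A n v (f :: rest)) :
    2 * ((pvAllLists A n).card - (pvExpandB v (f :: rest)).1.size) +
      (pvExpandB v (f :: rest)).2.length
    < 2 * ((pvAllLists A n).card - v.size) + (f :: rest).length := by
  obtain ⟨⟨h0, h1⟩, hv, hf⟩ := h
  obtain ⟨new, heq, hS, hmem, hsz⟩ := pvExpandB_fold_spec A n h0 h1 (f :: rest) v [] hf
  have e2 : (pvExpandB v (f :: rest)).2 = new := by rw [pvExpandB, heq]; rfl
  have hb : (pvExpandB v (f :: rest)).1.size ≤ (pvAllLists A n).card := by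
    refine pvHS_size_le _ _ ?_
    intro k hk
    rcases hmem k hk with h' | h'
    · exact hv k h'
    · exact hS k h'
  rw [e2, show (pvExpandB v (f :: rest)).1.size = v.size + new.length from hsz] at *
  simp only [List.length_cons] at *
  omega

def pvLoopB (target : List Char) (A : Finset Char) (n : Nat) :
    (v : Std.HashSet (List Char)) → (fr : List (List Char)) → (dist : Int) →
    pvInvB A n v fr → Int
  | _, [], _, _ => -1
  | v, f :: rest, dist, h =>
    if (f :: rest).contains target then dist
    else
      pvLoopB target A n (pvExpandB v (f :: rest)).1 (pvExpandB v (f :: rest)).2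
        (dist + 1) (pvInvB_step A n v f rest h)
  termination_by v fr _ _ => 2 * ((pvAllLists A n).card - v.size) + fr.length
  decreasing_by exact pvExpandB_dec A n v f rest h

theorem pvInitB (l : List Char) :
    pvInvB (pvAlpha l) l.length ((∅ : Std.HashSet (List Char)).insert l) [l] := by
  have hmem : l ∈ pvAllLists (pvAlpha l) l.length := by
    rw [pvMem_allLists]
    exact ⟨rfl, fun c hc => by simp [pvAlpha, List.mem_toFinset.mpr hc]⟩
  refine ⟨⟨by simp [pvAlpha], by simp [pvAlpha]⟩, ?_, ?_⟩
  · intro k hk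
    rcases Std.HashSet.mem_insert.mp hk with h' | h'
    · exact (beq_iff_eq.mp h') ▸ hmem
    · exact absurd h' (Std.HashSet.not_mem_empty)
  · intro x hx; simp at hx; exact hx ▸ hmem

theorem pvLoopA_nil (target : List Char) (A : Finset Char) (n : Nat)
    (D : Std.HashMap (List Char) Int) (h : pvInvA A n D []) :
    pvLoopA target A n D [] h = -1 := by rw [pvLoopA]

theorem pvLoopA_cons (target : List Char) (A : Finset Char) (n : Nat)
    (D : Std.HashMap (List Char) Int) (s : List Char) (rest : List (List Char))
    (h : pvInvA A n D (s :: rest)) :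
    pvLoopA target A n D (s :: rest) h =
      if s == target then D.getD s 0
      else pvLoopA target A n (pvInnerA s (D.getD s 0) (D, rest)).1
        (pvInnerA s (D.getD s 0) (D, rest)).2
        (pvInvA_step A n s (D.getD s 0) D rest h) := by rw [pvLoopA]

theorem pvLoopB_nil (target : List Char) (A : Finset Char) (n : Nat)
    (v : Std.HashSet (List Char)) (dist : Int) (h : pvInvB A n v []) :
    pvLoopB target A n v [] dist h = -1 := by rw [pvLoopB]

theorem pvLoopB_cons (target : List Char) (A : Finset Char) (n : Nat)
    (v : Std.HashSet (List Char)) (f : List Char) (rest : List (List Char)) (dist : Int)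
    (h : pvInvB A n v (f :: rest)) :
    pvLoopB target A n v (f :: rest) dist h =
      if (f :: rest).contains target then dist
      else pvLoopB target A n (pvExpandB v (f :: rest)).1 (pvExpandB v (f :: rest)).2
        (dist + 1) (pvInvB_step A n v f rest h) := by rw [pvLoopB]

theorem pvLoopA_congr (target : List Char) (A : Finset Char) (n : Nat)
    (D : Std.HashMap (List Char) Int) {q q' : List (List Char)} (e : q = q')
    (h : pvInvA A n D q) (h' : pvInvA A n D q') :
    pvLoopA target A n D q h = pvLoopA target A n D q' h' := by subst e; rfl

theorem pvLoopB_congr (target : List Char) (A : Finset Char) (n : Nat) (dist : Int)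
    (v : Std.HashSet (List Char)) {fr fr' : List (List Char)} (e2 : fr = fr')
    (h : pvInvB A n v fr) (h' : pvInvB A n v fr') :
    pvLoopB target A n v fr dist h = pvLoopB target A n v fr' dist h' := by
  subst e2; rfl

-- joint single-element lemma: A's inner loop and the level loop discover the same new states
theorem pvJoint (s : List Char) (d : Int) :
    ∀ (is : List Int), (∀ i ∈ is, 1 ≤ i ∧ i < (s.length : Int) - 1) →
    ∀ (D : Std.HashMap (List Char) Int) (q : List (List Char))
      (v : Std.HashSet (List Char)) (nxt : List (List Char)),
      (∀ t, D.contains t = v.contains t) →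
      ∃ new,
        (is.foldl (pvStepA s d) (D, q)).2 = q ++ new ∧
        (is.foldl (pvStepB s) (v, nxt)).2 = nxt ++ new ∧
        (∀ t, (is.foldl (pvStepA s d) (D, q)).1.contains t =
          (is.foldl (pvStepB s) (v, nxt)).1.contains t) ∧
        (∀ (t : List Char) (w : Int), D[t]? = some w →
          (is.foldl (pvStepA s d) (D, q)).1[t]? = some w) ∧
        (∀ t ∈ new, (is.foldl (pvStepA s d) (D, q)).1[t]? = some (d + 1)) := by
  intro is
  induction is with
  | nil =>
    intro _ D q v nxt hR
    exact ⟨[], by simp, by simp, hR, fun t w hw => hw, by simp⟩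
  | cons i is ih =>
    intro hrange D q v nxt hR
    obtain ⟨hi1, hi2⟩ := hrange i (by simp)
    have hrange' : ∀ j ∈ is, 1 ≤ j ∧ j < (s.length : Int) - 1 :=
      fun j hj => hrange j (by simp [hj])
    simp only [List.foldl_cons]
    by_cases hg : (PySem.List.pyGetD s (i - 1) ' ' == PySem.List.pyGetD s (i + 1) ' ') = true
    · have hA : pvStepA s d (D, q) i = (D, q) := by
        unfold pvStepA; rw [if_pos hg]
      have hB : pvStepB s (v, nxt) i = (v, nxt) := by
        unfold pvStepB; rw [hg]; simp
      rw [hA, hB]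
      exact ih hrange' D q v nxt hR
    · have hg' : (PySem.List.pyGetD s (i - 1) ' ' == PySem.List.pyGetD s (i + 1) ' ')
          = false := by simpa using hg
      set t0 := PySem.List.pySetD s i
        (if PySem.List.pyGetD s i ' ' == '0' then '1' else '0') with ht0
      by_cases hc : D.contains t0 = true
      · have hcB : v.contains t0 = true := by rw [← hR]; exact hc
        have hA : pvStepA s d (D, q) i = (D, q) := by
          unfold pvStepA; rw [if_neg hg]; dsimp only; rw [if_pos hc]
        have hB : pvStepB s (v, nxt) i = (v, nxt) := by
          unfold pvStepB; rw [pvT_eq s i hi1 hi2, hg']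
          simp only [Bool.not_false, if_true]
          rw [if_pos hcB]
        rw [hA, hB]
        exact ih hrange' D q v nxt hR
      · have hfresh : D.contains t0 = false := by simpa using hc
        have hcB : v.contains t0 = false := by rw [← hR]; exact hfresh
        have hA : pvStepA s d (D, q) i = (D.insert t0 (d + 1), q ++ [t0]) := by
          unfold pvStepA; rw [if_neg hg]; dsimp only; rw [if_neg hc]
        have hB : pvStepB s (v, nxt) i = (v.insert t0, nxt ++ [t0]) := by
          unfold pvStepB; rw [pvT_eq s i hi1 hi2, hg']
          simp only [Bool.not_false, if_true]
          rw [if_neg (by rw [hcB]; exact Bool.false_ne_true)]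
        rw [hA, hB]
        have hR1 : ∀ t, (D.insert t0 (d + 1)).contains t = (v.insert t0).contains t := by
          intro t
          rw [Std.HashMap.contains_insert, Std.HashSet.contains_insert, hR t]
        obtain ⟨new2, h1, h2, h3, h4, h5⟩ :=
          ih hrange' (D.insert t0 (d + 1)) (q ++ [t0]) (v.insert t0) (nxt ++ [t0]) hR1
        have hfreshget : D[t0]? = none := by
          have hiso : D[t0]?.isSome = false := by
            rw [← Std.HashMap.contains_eq_isSome_getElem?]; exact hfresh
          cases hgg : D[t0]? with
          | none => rfl
          | some w => rw [hgg] at hiso; cases hiso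
        refine ⟨t0 :: new2, ?_, ?_, h3, ?_, ?_⟩
        · rw [h1]; simp
        · rw [h2]; simp
        · intro t w hw
          have hne : (t0 == t) = false := beq_eq_false_iff_ne.mpr
            (fun he => by rw [← he, hfreshget] at hw; cases hw)
          refine h4 t w ?_
          rw [Std.HashMap.getElem?_insert, if_neg (by rw [hne]; exact Bool.false_ne_true)]
          exact hw
        · intro t ht
          rcases List.mem_cons.mp ht with ht2 | ht2
          · exact ht2 ▸ h4 t0 (d + 1) Std.HashMap.getElem?_insert_self
          · exact h5 t ht2

-- if the target sits in A's queue among states at distance d, A returns d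
theorem pvHit (target : List Char) (A : Finset Char) (n : Nat) (d : Int) :
    ∀ (F1 N : List (List Char)) (D : Std.HashMap (List Char) Int),
      target ∈ F1 → (∀ t ∈ F1, D[t]? = some d) →
      ∀ (h : pvInvA A n D (F1 ++ N)),
      pvLoopA target A n D (F1 ++ N) h = d := by
  intro F1
  induction F1 with
  | nil => intro N D htgt; simp at htgt
  | cons f F1 ih =>
    intro N D htgt hvals h
    show pvLoopA target A n D (f :: (F1 ++ N)) h = d
    rw [pvLoopA_cons]
    by_cases hft : (f == target) = true
    · rw [if_pos hft]
      rw [Std.HashMap.getD_eq_getD_getElem?, hvals f (by simp)]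
      rfl
    · rw [if_neg hft]
      have htgt2 : target ∈ F1 := by
        rcases List.mem_cons.mp htgt with he | he
        · exact absurd (beq_iff_eq.mpr he.symm) hft
        · exact he
      obtain ⟨⟨h0, h1⟩, hkeys, hq⟩ := id h
      obtain ⟨_, ⟨new, hq2, _, _⟩, hpres, _⟩ :=
        pvStepA_fold_spec A n f (D.getD f 0) (hq f (by simp)) h0 h1
          (PySem.List.pyRange 1 (PySem.List.len f - 1) 1) D (F1 ++ N) hkeys
      have e : (pvInnerA f (D.getD f 0) (D, F1 ++ N)).2 = F1 ++ (N ++ new) := by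
        simp only [pvInnerA]; rw [hq2, List.append_assoc]
      have hInv2 := pvInvA_step A n f (D.getD f 0) D (F1 ++ N) h
      refine (pvLoopA_congr target A n _ e _ (e ▸ hInv2)).trans ?_
      refine ih (N ++ new) _ htgt2 ?_ _
      intro t ht
      exact hpres t d (hvals t (by simp [ht]))

-- consuming one whole BFS level of A equals one frontier expansion of the level loop
theorem pvSeq (target : List Char) (A : Finset Char) (n : Nat) (d : Int) :
    ∀ (F N : List (List Char)) (D : Std.HashMap (List Char) Int)
      (v : Std.HashSet (List Char)) (nxt : List (List Char)),
      target ∉ F →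
      (∀ t, D.contains t = v.contains t) →
      (∀ t ∈ F, D[t]? = some d) →
      (∀ t ∈ N, D[t]? = some (d + 1)) →
      ∀ (hInv : pvInvA A n D (F ++ N)),
      ∃ (D' : Std.HashMap (List Char) Int) (new : List (List Char))
        (hInv' : pvInvA A n D' (N ++ new)),
        pvLoopA target A n D (F ++ N) hInv = pvLoopA target A n D' (N ++ new) hInv' ∧
        (F.foldl (fun st s => pvNbrB s st) (v, nxt)).2 = nxt ++ new ∧
        (∀ t, D'.contains t =
          (F.foldl (fun st s => pvNbrB s st) (v, nxt)).1.contains t) ∧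
        (∀ t ∈ N ++ new, D'[t]? = some (d + 1)) ∧
        2 * ((pvAllLists A n).card - D'.size) + (N ++ new).length + F.length ≤
          2 * ((pvAllLists A n).card - D.size) + (F ++ N).length := by
  intro F
  induction F with
  | nil =>
    intro N D v nxt htgt hR hvalsF hvalsN hInv
    refine ⟨D, [], by simpa using hInv, ?_, by simp, ?_, by simpa using hvalsN, by simp⟩
    · exact pvLoopA_congr target A n D (by simp) hInv _
    · intro t; exact hR t
  | cons f F ih =>
    intro N D v nxt htgt hR hvalsF hvalsN hInv
    obtain ⟨⟨h0, h1⟩, hkeys, hq⟩ := id hInv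
    have hsf : f ∈ pvAllLists A n := hq f (by simp)
    have hrange : ∀ i ∈ PySem.List.pyRange 1 (PySem.List.len f - 1) 1,
        1 ≤ i ∧ i < (f.length : Int) - 1 := by
      intro i hi
      rw [PySem.List.len_eq] at hi
      exact PySem.List.mem_pyRange_one.mp hi
    obtain ⟨new1, hA2, hB2, hR2, hpres2, hval2⟩ :=
      pvJoint f d (PySem.List.pyRange 1 (PySem.List.len f - 1) 1) hrange D (F ++ N) v nxt hR
    obtain ⟨hk1, ⟨new1', hq2', _, _⟩, _, hcount1⟩ :=
      pvStepA_fold_spec A n f d hsf h0 h1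
        (PySem.List.pyRange 1 (PySem.List.len f - 1) 1) D (F ++ N) hkeys
    have hnew1' : new1' = new1 := List.append_cancel_left (hq2' ▸ hA2)
    have hdf : D.getD f 0 = d := by
      rw [Std.HashMap.getD_eq_getD_getElem?, hvalsF f (by simp)]; rfl
    have hfne : ¬ (f == target) = true := by
      intro hbe
      exact htgt (by simp [beq_iff_eq.mp hbe|>.symm])
    have hInv1 := pvInvA_step A n f (D.getD f 0) D (F ++ N) hInv
    rw [hdf] at hInv1
    have e1 : (pvInnerA f d (D, F ++ N)).2 = F ++ (N ++ new1) := by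
      simp only [pvInnerA]; rw [hA2, List.append_assoc]
    have hInv1' : pvInvA A n (pvInnerA f d (D, F ++ N)).1 (F ++ (N ++ new1)) :=
      e1 ▸ hInv1
    have hstep : pvLoopA target A n D ((f :: F) ++ N) hInv =
        pvLoopA target A n (pvInnerA f d (D, F ++ N)).1 (F ++ (N ++ new1)) hInv1' := by
      have hcons := pvLoopA_cons target A n D f (F ++ N) hInv
      rw [hdf] at hcons
      exact hcons.trans (by rw [if_neg hfne]; exact pvLoopA_congr target A n _ e1 _ _)
    have hB2' : (pvNbrB f (v, nxt)).2 = nxt ++ new1 := hB2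
    have hsplit : pvNbrB f (v, nxt) = ((pvNbrB f (v, nxt)).1, nxt ++ new1) := by
      rw [← hB2']
    have hR2' : ∀ t, (pvInnerA f d (D, F ++ N)).1.contains t =
        (pvNbrB f (v, nxt)).1.contains t := hR2
    obtain ⟨D', new2, hInv', heqloop, hfold2, hR3, hvals3, hmeas2⟩ :=
      ih (N ++ new1) (pvInnerA f d (D, F ++ N)).1 (pvNbrB f (v, nxt)).1 (nxt ++ new1)
        (fun hmem => htgt (by simp [hmem]))
        hR2'
        (fun t ht => by
          simpa only [pvInnerA] using hpres2 t d (hvalsF t (by simp [ht])))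
        (fun t ht => by
          rcases List.mem_append.mp ht with ht2 | ht2
          · simpa only [pvInnerA] using hpres2 t (d + 1) (hvalsN t ht2)
          · simpa only [pvInnerA] using hval2 t ht2)
        hInv1'
    refine ⟨D', new1 ++ new2, (List.append_assoc N new1 new2) ▸ hInv', ?_, ?_, ?_, ?_, ?_⟩
    · rw [hstep, heqloop]
      exact pvLoopA_congr target A n D' (List.append_assoc N new1 new2) _ _
    · rw [List.foldl_cons, hsplit, hfold2]
      simp
    · intro t
      rw [List.foldl_cons, hsplit]
      exact hR3 t
    · intro t ht
      exact hvals3 t (by simpa [List.append_assoc] using ht)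
    · have hD1len : (pvInnerA f d (D, F ++ N)).1.size =
          D.size + new1.length := by
        simp only [pvInnerA]
        rw [show (List.foldl (pvStepA f d) (D, F ++ N)
            (PySem.List.pyRange 1 (PySem.List.len f - 1) 1)).2.length =
            ((F ++ N) ++ new1).length from by rw [← hnew1'] at hA2; rw [hA2, hnew1']] at hcount1
        simp only [List.length_append] at hcount1 ⊢
        omega
      have hD1card : (pvInnerA f d (D, F ++ N)).1.size ≤ (pvAllLists A n).card := by
        exact pvHM_size_le (pvAllLists A n) _ (by simpa only [pvInnerA] using hk1)
      rw [hD1len] at hmeas2 hD1card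
      simp only [List.length_append, List.length_cons] at hmeas2 ⊢
      omega

-- A's queue BFS equals the level-synchronous loop, by strong induction on A's measure
theorem pvMain (target : List Char) (A : Finset Char) (n : Nat) :
    ∀ (m : Nat) (d : Int) (D : Std.HashMap (List Char) Int)
      (v : Std.HashSet (List Char)) (F : List (List Char)),
      2 * ((pvAllLists A n).card - D.size) + F.length ≤ m →
      (∀ t, D.contains t = v.contains t) →
      (∀ t ∈ F, D[t]? = some d) →
      ∀ (hA : pvInvA A n D F) (hB : pvInvB A n v F),
      pvLoopA target A n D F hA = pvLoopB target A n v F d hB := by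
  intro m
  induction m with
  | zero =>
    intro d D v F hm hR hvals hA hB
    have hF : F = [] := by
      cases F with
      | nil => rfl
      | cons a b => simp at hm
    subst hF
    rw [pvLoopA_nil, pvLoopB_nil]
  | succ m ih =>
    intro d D v F hm hR hvals hA hB
    cases F with
    | nil => rw [pvLoopA_nil, pvLoopB_nil]
    | cons f rest =>
      rw [pvLoopB_cons]
      by_cases hmem : target ∈ f :: rest
      · rw [if_pos (by simpa using hmem)]
        have hA2 : pvInvA A n D ((f :: rest) ++ []) := (List.append_nil (f :: rest)).symm ▸ hA
        rw [pvLoopA_congr target A n D (List.append_nil (f :: rest)).symm hA hA2]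
        exact pvHit target A n d (f :: rest) [] D hmem hvals hA2
      · rw [if_neg (by simpa using hmem)]
        have hA2 : pvInvA A n D ((f :: rest) ++ []) := (List.append_nil (f :: rest)).symm ▸ hA
        obtain ⟨D', new, hInv', heqloop, hfold, hR', hvals', hmeas⟩ :=
          pvSeq target A n d (f :: rest) [] D v [] hmem hR hvals (by simp) hA2
        simp only [List.nil_append] at hInv' heqloop hfold hR' hvals' hmeas
        have e2 : (pvExpandB v (f :: rest)).2 = new := hfold
        have hBstep := pvInvB_step A n v f rest hB
        rw [pvLoopB_congr target A n (d + 1) (pvExpandB v (f :: rest)).1 e2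
          hBstep (e2 ▸ hBstep)]
        rw [pvLoopA_congr target A n D (List.append_nil (f :: rest)).symm hA hA2, heqloop]
        refine ih (d + 1) D' (pvExpandB v (f :: rest)).1 new ?_ hR' hvals' hInv'
          (e2 ▸ hBstep)
        simp only [List.length_append, List.length_cons, List.length_nil] at hmeas hm ⊢
        omega


-- ===== the common specification: shortest flip-distance in the move graph =====
-- one legal move: flip position i (1 <= i <= len-2) where the two neighbours differ
def pvG (s : List Char) (i : Int) : Prop :=
  ¬ (PySem.List.pyGetD s (i - 1) ' ' = PySem.List.pyGetD s (i + 1) ' ')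

def pvTgt (s : List Char) (i : Int) : List Char :=
  PySem.List.pySetD s i (if PySem.List.pyGetD s i ' ' == '0' then '1' else '0')

def pvEdge (u x : List Char) : Prop :=
  ∃ i : Int, 1 ≤ i ∧ i < (u.length : Int) - 1 ∧ pvG u i ∧ x = pvTgt u i

-- walks of a given length
def pvReachF : List Char → Nat → List Char → Prop
  | y, 0, x => x = y
  | y, m + 1, x => ∃ u, pvReachF y m u ∧ pvEdge u x

def pvBall (src : List Char) (k : Nat) (x : List Char) : Prop :=
  ∃ m ≤ k, pvReachF src m x

def pvSphere (src : List Char) (k : Nat) (x : List Char) : Prop :=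
  pvBall src k x ∧ ∀ m < k, ¬ pvReachF src m x

-- the value both programs compute: least walk length, or -1 if unreachable
noncomputable def pvDres (src target : List Char) : Int :=
  haveI := Classical.propDecidable (∃ m, pvReachF src m target)
  if ∃ m, pvReachF src m target then ((sInf {m | pvReachF src m target} : Nat) : Int)
  else -1

theorem pvReachF_add (y : List Char) (a b : Nat) (x : List Char) :
    pvReachF y (a + b) x ↔ ∃ z, pvReachF y a z ∧ pvReachF z b x := by
  induction b generalizing x with
  | zero =>
    constructor
    · intro h; exact ⟨x, h, rfl⟩
    · rintro ⟨z, hz, he⟩; rw [show x = z from he]; exact hz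
  | succ b ih =>
    constructor
    · rintro ⟨u, hu, he⟩
      obtain ⟨z, hz, hzu⟩ := (ih u).mp hu
      exact ⟨z, hz, u, hzu, he⟩
    · rintro ⟨z, hz, u, hzu, he⟩
      exact ⟨u, (ih u).mpr ⟨z, hz, hzu⟩, he⟩

theorem pvBall_succ (src : List Char) (k : Nat) (x : List Char) :
    pvBall src (k + 1) x ↔ pvBall src k x ∨ ∃ s, pvSphere src k s ∧ pvEdge s x := by
  constructor
  · rintro ⟨m, hm, hR⟩
    by_cases hin : pvBall src k x
    · exact Or.inl hin
    · have hmk : m = k + 1 := by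
        rcases Nat.lt_or_ge m (k + 1) with h' | h'
        · exact absurd ⟨m, by omega, hR⟩ hin
        · omega
      subst hmk
      obtain ⟨u, hu, he⟩ := hR
      refine Or.inr ⟨u, ⟨⟨k, le_refl k, hu⟩, ?_⟩, he⟩
      intro j hj hRj
      exact hin ⟨j + 1, by omega, u, hRj, he⟩
  · rintro (⟨m, hm, hR⟩ | ⟨u, ⟨⟨m, hm, hR⟩, _⟩, he⟩)
    · exact ⟨m, by omega, hR⟩
    · exact ⟨m + 1, by omega, u, hR, he⟩

theorem pvDres_eq_neg_one (src target : List Char) (k : Nat)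
    (hsph : ∀ x, ¬ pvSphere src k x)
    (hpre : ∀ j < k, ¬ pvReachF src j target) : pvDres src target = -1 := by
  unfold pvDres
  haveI := Classical.propDecidable (∃ m, pvReachF src m target)
  rw [if_neg]
  rintro ⟨nn, hR⟩
  have hne : {m | pvReachF src m target}.Nonempty := ⟨nn, hR⟩
  set n0 := sInf {m | pvReachF src m target} with hn0
  have hmem : pvReachF src n0 target := Nat.sInf_mem hne
  have hmin : ∀ j < n0, ¬ pvReachF src j target := fun j hj hRj =>
    Nat.notMem_of_lt_sInf hj hRj
  have hk0 : k ≤ n0 := by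
    by_contra hlt
    exact hpre n0 (by omega) hmem
  have hsplitR : pvReachF src (k + (n0 - k)) target := by
    rw [show k + (n0 - k) = n0 from by omega]
    exact hmem
  obtain ⟨z, hz, hzx⟩ := (pvReachF_add src k (n0 - k) target).mp hsplitR
  have hnsp := hsph z
  unfold pvSphere at hnsp
  push_neg at hnsp
  obtain ⟨j, hj, hRj⟩ := hnsp ⟨k, le_refl k, hz⟩
  have : pvReachF src (j + (n0 - k)) target :=
    (pvReachF_add src j (n0 - k) target).mpr ⟨z, hRj, hzx⟩
  exact hmin (j + (n0 - k)) (by omega) this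

theorem pvDres_eq_of_sphere (src target : List Char) (k : Nat)
    (h : pvSphere src k target) : pvDres src target = (k : Int) := by
  obtain ⟨⟨m, hm, hR⟩, hmin⟩ := h
  have hmk : m = k := by
    rcases Nat.lt_or_ge m k with h' | h'
    · exact absurd hR (hmin m h')
    · omega
  subst hmk
  unfold pvDres
  haveI := Classical.propDecidable (∃ m', pvReachF src m' target)
  rw [if_pos ⟨m, hR⟩]
  congr 1
  have h1 : sInf {m' | pvReachF src m' target} ≤ m := Nat.sInf_le hR
  have h2 : ¬ sInf {m' | pvReachF src m' target} < m := by
    intro hlt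
    have hne2 : {m' | pvReachF src m' target}.Nonempty := ⟨m, hR⟩
    exact hmin _ hlt (Nat.sInf_mem hne2)
  omega

-- membership characterisation of one level-expansion step
theorem pvStepB_mem (s : List Char) (st : Std.HashSet (List Char) × List (List Char))
    (i : Int) (hi1 : 1 ≤ i) (hi2 : i < (s.length : Int) - 1) (x : List Char) :
    (x ∈ (pvStepB s st i).1 ↔ x ∈ st.1 ∨ (pvG s i ∧ x = pvTgt s i)) ∧
    (x ∈ (pvStepB s st i).2 ↔ x ∈ st.2 ∨ (x ∉ st.1 ∧ pvG s i ∧ x = pvTgt s i)) := by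
  have ht : PySem.List.slice s none (some i) ++
      [if PySem.List.pyGetD s i ' ' == '0' then '1' else '0'] ++
      PySem.List.slice s (some (i + 1)) none = pvTgt s i := pvT_eq s i hi1 hi2 _
  unfold pvStepB
  rw [ht]
  by_cases hg : pvG s i
  · have hgb : (PySem.List.pyGetD s (i - 1) ' ' == PySem.List.pyGetD s (i + 1) ' ')
        = false := by
      simpa [pvG] using hg
    rw [hgb]
    simp only [Bool.not_false, if_true]
    by_cases hc : st.1.contains (pvTgt s i) = true
    · have hcm : pvTgt s i ∈ st.1 := hc
      rw [if_pos hc]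
      constructor
      · constructor
        · intro h'; exact Or.inl h'
        · rintro (h' | ⟨_, h'⟩)
          · exact h'
          · exact h' ▸ hcm
      · constructor
        · intro h'; exact Or.inl h'
        · rintro (h' | ⟨hnm, _, h'⟩)
          · exact h'
          · exact absurd (h' ▸ hcm) hnm
    · have hnm : pvTgt s i ∉ st.1 := fun hm =>
        hc (Std.HashSet.mem_iff_contains.mp hm)
      rw [if_neg hc]
      constructor
      · rw [Std.HashSet.mem_insert]
        constructor
        · rintro (h' | h')
          · exact Or.inr ⟨hg, (beq_iff_eq.mp h').symm⟩
          · exact Or.inl h'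
        · rintro (h' | ⟨_, h'⟩)
          · exact Or.inr h'
          · exact Or.inl (by simp [h'])
      · show x ∈ st.2 ++ [pvTgt s i] ↔ _
        rw [List.mem_append, List.mem_singleton]
        constructor
        · rintro (h' | h')
          · exact Or.inl h'
          · exact Or.inr ⟨h' ▸ hnm, hg, h'⟩
        · rintro (h' | ⟨_, _, h'⟩)
          · exact Or.inl h'
          · exact Or.inr h'
  · have hgb : (PySem.List.pyGetD s (i - 1) ' ' == PySem.List.pyGetD s (i + 1) ' ')
        = true := by
      simp only [pvG, not_not] at hg
      simp [hg]
    rw [hgb]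
    simp only [Bool.not_true]
    exact ⟨by tauto, by tauto⟩

theorem pvFoldB_mem (s : List Char) :
    ∀ (is : List Int), (∀ i ∈ is, 1 ≤ i ∧ i < (s.length : Int) - 1) →
    ∀ (v : Std.HashSet (List Char)) (nxt : List (List Char)) (x : List Char),
      (x ∈ (is.foldl (pvStepB s) (v, nxt)).1 ↔
        x ∈ v ∨ ∃ i ∈ is, pvG s i ∧ x = pvTgt s i) ∧
      (x ∈ (is.foldl (pvStepB s) (v, nxt)).2 ↔
        x ∈ nxt ∨ (x ∉ v ∧ ∃ i ∈ is, pvG s i ∧ x = pvTgt s i)) := by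
  intro is
  induction is with
  | nil => intro _ v nxt x; simp
  | cons i is ih =>
    intro hb v nxt x
    obtain ⟨hi1, hi2⟩ := hb i (by simp)
    simp only [List.foldl_cons]
    have hstep1 := (pvStepB_mem s (v, nxt) i hi1 hi2 x).1
    have hstep2 := (pvStepB_mem s (v, nxt) i hi1 hi2 x).2
    have hsplit : pvStepB s (v, nxt) i =
        ((pvStepB s (v, nxt) i).1, (pvStepB s (v, nxt) i).2) := rfl
    rw [hsplit]
    obtain ⟨hf1, hf2⟩ := ih (fun j hj => hb j (by simp [hj]))
      (pvStepB s (v, nxt) i).1 (pvStepB s (v, nxt) i).2 x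
    constructor
    · rw [hf1, hstep1]
      constructor
      · rintro ((h' | h') | ⟨j, hj, h'⟩)
        · exact Or.inl h'
        · exact Or.inr ⟨i, by simp, h'⟩
        · exact Or.inr ⟨j, by simp [hj], h'⟩
      · rintro (h' | ⟨j, hj, h'⟩)
        · exact Or.inl (Or.inl h')
        · rcases List.mem_cons.mp hj with hj' | hj'
          · exact Or.inl (Or.inr (hj' ▸ h'))
          · exact Or.inr ⟨j, hj', h'⟩
    · rw [hf2, hstep2, hstep1]
      constructor
      · rintro ((h' | ⟨hnv, h'⟩) | ⟨hnv, j, hj, h'⟩)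
        · exact Or.inl h'
        · exact Or.inr ⟨hnv, i, by simp, h'⟩
        · push_neg at hnv
          exact Or.inr ⟨hnv.1, j, by simp [hj], h'⟩
      · rintro (h' | ⟨hnv, j, hj, h'⟩)
        · exact Or.inl (Or.inl h')
        · rcases List.mem_cons.mp hj with hj' | hj'
          · exact Or.inl (Or.inr ⟨hnv, hj' ▸ h'⟩)
          · by_cases hx : x ∈ v ∨ (pvG s i ∧ x = pvTgt s i)
            · rcases hx with hx | hx
              · exact absurd hx hnv
              · exact Or.inl (Or.inr ⟨hnv, hx⟩)
            · rw [not_or] at hx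
              exact Or.inr ⟨not_or.mpr hx, j, hj', h'⟩

theorem pvEdge_iff (s x : List Char) :
    pvEdge s x ↔ ∃ i ∈ PySem.List.pyRange 1 (PySem.List.len s - 1) 1,
      pvG s i ∧ x = pvTgt s i := by
  unfold pvEdge
  constructor
  · rintro ⟨i, hi1, hi2, hg, hx⟩
    refine ⟨i, ?_, hg, hx⟩
    rw [PySem.List.len_eq]
    exact PySem.List.mem_pyRange_one.mpr ⟨hi1, by omega⟩
  · rintro ⟨i, hi, hg, hx⟩
    rw [PySem.List.len_eq] at hi
    obtain ⟨hi1, hi2⟩ := PySem.List.mem_pyRange_one.mp hi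
    exact ⟨i, hi1, by omega, hg, hx⟩

theorem pvExpandB_mem' (fr : List (List Char)) :
    ∀ (v : Std.HashSet (List Char)) (nxt : List (List Char)) (x : List Char),
      (x ∈ (fr.foldl (fun st s => pvNbrB s st) (v, nxt)).1 ↔
        x ∈ v ∨ ∃ s ∈ fr, pvEdge s x) ∧
      (x ∈ (fr.foldl (fun st s => pvNbrB s st) (v, nxt)).2 ↔
        x ∈ nxt ∨ (x ∉ v ∧ ∃ s ∈ fr, pvEdge s x)) := by
  induction fr with
  | nil => intro v nxt x; simp
  | cons f fr ih =>
    intro v nxt x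
    simp only [List.foldl_cons]
    have hb : ∀ i ∈ PySem.List.pyRange 1 (PySem.List.len f - 1) 1,
        1 ≤ i ∧ i < (f.length : Int) - 1 := by
      intro i hi
      rw [PySem.List.len_eq] at hi
      exact PySem.List.mem_pyRange_one.mp hi
    have hstep1 := (pvFoldB_mem f _ hb v nxt x).1
    have hstep2 := (pvFoldB_mem f _ hb v nxt x).2
    have hsplit : pvNbrB f (v, nxt) =
        ((pvNbrB f (v, nxt)).1, (pvNbrB f (v, nxt)).2) := rfl
    rw [hsplit]
    obtain ⟨hf1, hf2⟩ := ih (pvNbrB f (v, nxt)).1 (pvNbrB f (v, nxt)).2 x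
    have hE : (∃ i ∈ PySem.List.pyRange 1 (PySem.List.len f - 1) 1,
        pvG f i ∧ x = pvTgt f i) ↔ pvEdge f x := (pvEdge_iff f x).symm
    have hstep1' : x ∈ (pvNbrB f (v, nxt)).1 ↔ x ∈ v ∨ pvEdge f x := by
      rw [show (pvNbrB f (v, nxt)).1 =
        ((PySem.List.pyRange 1 (PySem.List.len f - 1) 1).foldl (pvStepB f) (v, nxt)).1
        from rfl, hstep1, hE]
    have hstep2' : x ∈ (pvNbrB f (v, nxt)).2 ↔
        x ∈ nxt ∨ (x ∉ v ∧ pvEdge f x) := by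
      rw [show (pvNbrB f (v, nxt)).2 =
        ((PySem.List.pyRange 1 (PySem.List.len f - 1) 1).foldl (pvStepB f) (v, nxt)).2
        from rfl, hstep2, hE]
    constructor
    · rw [hf1, hstep1']
      constructor
      · rintro ((h' | h') | ⟨g, hg, h'⟩)
        · exact Or.inl h'
        · exact Or.inr ⟨f, by simp, h'⟩
        · exact Or.inr ⟨g, by simp [hg], h'⟩
      · rintro (h' | ⟨g, hg, h'⟩)
        · exact Or.inl (Or.inl h')
        · rcases List.mem_cons.mp hg with hg' | hg'
          · exact Or.inl (Or.inr (hg' ▸ h'))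
          · exact Or.inr ⟨g, hg', h'⟩
    · rw [hf2, hstep2', hstep1']
      constructor
      · rintro ((h' | ⟨hnv, h'⟩) | ⟨hnv, g, hg, h'⟩)
        · exact Or.inl h'
        · exact Or.inr ⟨hnv, f, by simp, h'⟩
        · push_neg at hnv
          exact Or.inr ⟨hnv.1, g, by simp [hg], h'⟩
      · rintro (h' | ⟨hnv, g, hg, h'⟩)
        · exact Or.inl (Or.inl h')
        · rcases List.mem_cons.mp hg with hg' | hg'
          · exact Or.inl (Or.inr ⟨hnv, hg' ▸ h'⟩)
          · by_cases hx : x ∈ v ∨ pvEdge f x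
            · rcases hx with hx | hx
              · exact absurd hx hnv
              · exact Or.inl (Or.inr ⟨hnv, hx⟩)
            · rw [not_or] at hx
              exact Or.inr ⟨not_or.mpr hx, g, hg', h'⟩

-- the level-synchronous loop computes the shortest distance
theorem pvLevelMain (src target : List Char) (A : Finset Char) (n : Nat) :
    ∀ (m : Nat) (k : Nat) (v : Std.HashSet (List Char)) (fr : List (List Char)),
      2 * ((pvAllLists A n).card - v.size) + fr.length ≤ m →
      (∀ x, x ∈ v ↔ pvBall src k x) →
      (∀ x, x ∈ fr ↔ pvSphere src k x) →
      (∀ j < k, ¬ pvReachF src j target) →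
      ∀ (hB : pvInvB A n v fr),
      pvLoopB target A n v fr (k : Int) hB = pvDres src target := by
  intro m
  induction m with
  | zero =>
    intro k v fr hm hball hsph hpre hB
    have hF : fr = [] := by
      cases fr with
      | nil => rfl
      | cons a b => simp at hm
    subst hF
    rw [pvLoopB_nil]
    exact (pvDres_eq_neg_one src target k
      (fun x hx => by have := (hsph x).mpr hx; simp at this) hpre).symm
  | succ m ih =>
    intro k v fr hm hball hsph hpre hB
    cases fr with
    | nil =>
      rw [pvLoopB_nil]
      exact (pvDres_eq_neg_one src target k
        (fun x hx => by have := (hsph x).mpr hx; simp at this) hpre).symm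
    | cons f rest =>
      rw [pvLoopB_cons]
      by_cases hmem : target ∈ f :: rest
      · rw [if_pos (by simpa using hmem)]
        exact (pvDres_eq_of_sphere src target k ((hsph target).mp hmem)).symm
      · rw [if_neg (by simpa using hmem)]
        have hv' : ∀ x, x ∈ (pvExpandB v (f :: rest)).1 ↔ pvBall src (k + 1) x := by
          intro x
          have h1 := (pvExpandB_mem' (f :: rest) v [] x).1
          rw [show (pvExpandB v (f :: rest)).1 =
            ((f :: rest).foldl (fun st s => pvNbrB s st) (v, [])).1 from rfl, h1,
            pvBall_succ]
          constructor
          · rintro (hxv | ⟨s, hs, he⟩)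
            · exact Or.inl ((hball x).mp hxv)
            · exact Or.inr ⟨s, (hsph s).mp hs, he⟩
          · rintro (hb | ⟨s, hS, he⟩)
            · exact Or.inl ((hball x).mpr hb)
            · exact Or.inr ⟨s, (hsph s).mpr hS, he⟩
        have hf' : ∀ x, x ∈ (pvExpandB v (f :: rest)).2 ↔ pvSphere src (k + 1) x := by
          intro x
          have h2 := (pvExpandB_mem' (f :: rest) v [] x).2
          rw [show (pvExpandB v (f :: rest)).2 =
            ((f :: rest).foldl (fun st s => pvNbrB s st) (v, [])).2 from rfl, h2]
          simp only [List.not_mem_nil, false_or]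
          constructor
          · rintro ⟨hnv, s, hs, he⟩
            have hS := (hsph s).mp hs
            refine ⟨(pvBall_succ src k x).mpr (Or.inr ⟨s, hS, he⟩), ?_⟩
            intro j hj hRj
            exact hnv ((hball x).mpr ⟨j, by omega, hRj⟩)
          · rintro ⟨hb1, hmin⟩
            have hnv : x ∉ v := by
              intro hxv
              obtain ⟨j, hj, hRj⟩ := (hball x).mp hxv
              exact hmin j (by omega) hRj
            rcases (pvBall_succ src k x).mp hb1 with hbk | ⟨s, hS, he⟩
            · exfalso
              obtain ⟨j, hj, hRj⟩ := hbk
              exact hmin j (by omega) hRj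
            · exact ⟨hnv, s, (hsph s).mpr hS, he⟩
        have hpre' : ∀ j < k + 1, ¬ pvReachF src j target := by
          intro j hj hR
          rcases Nat.lt_or_ge j k with hjk | hjk
          · exact hpre j hjk hR
          · have hjked : j = k := by omega
            subst hjked
            exact hmem ((hsph target).mpr ⟨⟨j, le_refl j, hR⟩, hpre⟩)
        have hdec := pvExpandB_dec A n v f rest hB
        have hcast : (k : Int) + 1 = ((k + 1 : Nat) : Int) := by push_cast; ring
        rw [hcast]
        exact ih (k + 1) (pvExpandB v (f :: rest)).1 (pvExpandB v (f :: rest)).2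
          (by omega) hv' hf' hpre' (pvInvB_step A n v f rest hB)


-- ===== the relaxation loop computes the shortest distance =====
def pvInv2 (src : List Char) (D : PySem.Dict (List Char) Int) : Prop :=
  D.get? src = some 0 ∧ ∀ p ∈ D.items, 0 ≤ p.2 ∧ pvReachF src p.2.toNat p.1

theorem pvRelaxI_inv2 (src s : List Char) (d : Int)
    (st : PySem.Dict (List Char) Int × Bool) (i : Int)
    (hi1 : 1 ≤ i) (hi2 : i < (s.length : Int) - 1)
    (hds : pvReachF src d.toNat s) (hd0 : 0 ≤ d)
    (h2 : pvInv2 src st.1) : pvInv2 src (pvRelaxI s d st i).1 := by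
  rcases pvRelaxI_cases s d st i hi1 hi2 with hid | ⟨hcond, hg, heq⟩
  · rw [hid]; exact h2
  · rw [heq]
    have hts : PySem.List.pySetD s i
        (if PySem.List.pyGetD s i ' ' == '0' then '1' else '0') ≠ src := by
      intro hts
      rcases hcond with hnone | ⟨e, hsome, hlt⟩
      · rw [hts, h2.1] at hnone
        cases hnone
      · rw [hts, h2.1] at hsome
        have he0 : e = (0 : Int) := by
          have := Option.some.inj hsome
          omega
        omega
    refine ⟨?_, ?_⟩
    · show (st.1.insert _ (d + 1)).get? src = some 0
      rw [PySem.Dict.get?_insert_of_ne st.1 (d + 1) (Ne.symm hts)]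
      exact h2.1
    · intro p hp
      rcases (PySem.Dict.mem_items_insert st.1 _ _ _).mp hp with hpe | ⟨hpi, _⟩
      · rw [hpe]
        refine ⟨by omega, ?_⟩
        have htn : (d + 1).toNat = d.toNat + 1 := by omega
        rw [htn]
        exact ⟨s, hds, ⟨i, hi1, hi2, hg, rfl⟩⟩
      · exact h2.2 p hpi

theorem pvFoldR_inv2 (src s : List Char) (d : Int)
    (hds : pvReachF src d.toNat s) (hd0 : 0 ≤ d) :
    ∀ (is : List Int), (∀ i ∈ is, 1 ≤ i ∧ i < (s.length : Int) - 1) →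
    ∀ (st : PySem.Dict (List Char) Int × Bool), pvInv2 src st.1 →
      pvInv2 src ((is.foldl (pvRelaxI s d) st)).1 := by
  intro is
  induction is with
  | nil => intro _ st h; exact h
  | cons i is ih =>
    intro hb st h
    obtain ⟨hi1, hi2⟩ := hb i (by simp)
    simp only [List.foldl_cons]
    exact ih (fun j hj => hb j (by simp [hj])) (pvRelaxI s d st i)
      (pvRelaxI_inv2 src s d st i hi1 hi2 hds hd0 h)

theorem pvPass_inv2 (src : List Char) (D : PySem.Dict (List Char) Int)
    (h2 : pvInv2 src D) : pvInv2 src (pvPass D).1 := by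
  have hgen : ∀ (L : List (List Char × Int)),
      (∀ p ∈ L, 0 ≤ p.2 ∧ pvReachF src p.2.toNat p.1) →
      ∀ (st : PySem.Dict (List Char) Int × Bool), pvInv2 src st.1 →
        pvInv2 src ((L.foldl pvPassStep st)).1 := by
    intro L
    induction L with
    | nil => intro _ st h; exact h
    | cons p L ih =>
      intro hL st h
      simp only [List.foldl_cons]
      refine ih (fun q hq => hL q (by simp [hq])) (pvPassStep st p) ?_
      unfold pvPassStep
      refine pvFoldR_inv2 src p.1 p.2 (hL p (by simp)).2 (hL p (by simp)).1 _ ?_ st h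
      intro i hi
      rw [PySem.List.len_eq] at hi
      exact PySem.List.mem_pyRange_one.mp hi
  exact hgen D.items h2.2 (D, false) h2

theorem pvRelaxI_nochange (s : List Char) (d : Int)
    (st : PySem.Dict (List Char) Int × Bool) (i : Int)
    (hi1 : 1 ≤ i) (hi2 : i < (s.length : Int) - 1)
    (h : (pvRelaxI s d st i).2 = false) :
    pvRelaxI s d st i = st ∧ st.2 = false ∧
      (pvG s i → ∃ e, st.1.get? (pvTgt s i) = some e ∧ e ≤ d + 1) := by
  have ht : pvFlip s i = pvTgt s i := pvT_eq s i hi1 hi2 _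
  unfold pvRelaxI at h ⊢
  rw [ht] at h ⊢
  by_cases hg : pvG s i
  · have hgb : (PySem.List.pyGetD s (i - 1) ' ' == PySem.List.pyGetD s (i + 1) ' ')
        = false := by simpa [pvG] using hg
    rw [hgb] at h ⊢
    simp only [Bool.not_false, if_true] at h ⊢
    cases hget : st.1.get? (pvTgt s i) with
    | none => rw [hget] at h; simp at h
    | some e =>
      rw [hget] at h
      dsimp only at h ⊢
      by_cases hlt : d + 1 < e
      · rw [if_pos hlt] at h; simp at h
      · rw [if_neg hlt] at h ⊢
        exact ⟨rfl, h, fun _ => ⟨e, rfl, by omega⟩⟩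
  · have hgb : (PySem.List.pyGetD s (i - 1) ' ' == PySem.List.pyGetD s (i + 1) ' ')
        = true := by
      simp only [pvG, not_not] at hg
      simp [hg]
    rw [hgb] at h ⊢
    simp only [Bool.not_true] at h ⊢
    exact ⟨rfl, h, fun hG => absurd hG hg⟩

theorem pvFoldR_nochange (s : List Char) (d : Int) :
    ∀ (is : List Int), (∀ i ∈ is, 1 ≤ i ∧ i < (s.length : Int) - 1) →
    ∀ (st : PySem.Dict (List Char) Int × Bool),
      (is.foldl (pvRelaxI s d) st).2 = false →
      is.foldl (pvRelaxI s d) st = st ∧ st.2 = false ∧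
        ∀ i ∈ is, pvG s i → ∃ e, st.1.get? (pvTgt s i) = some e ∧ e ≤ d + 1 := by
  intro is
  induction is with
  | nil => intro _ st h; exact ⟨rfl, h, by simp⟩
  | cons i is ih =>
    intro hb st h
    obtain ⟨hi1, hi2⟩ := hb i (by simp)
    simp only [List.foldl_cons] at h ⊢
    obtain ⟨heq, hflag, hcl⟩ := ih (fun j hj => hb j (by simp [hj])) (pvRelaxI s d st i) h
    obtain ⟨heq0, hflag0, hcl0⟩ := pvRelaxI_nochange s d st i hi1 hi2 hflag
    rw [heq0] at heq hcl ⊢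
    refine ⟨heq, hflag0, ?_⟩
    intro j hj
    rcases List.mem_cons.mp hj with hj' | hj'
    · exact hj' ▸ hcl0
    · exact hcl j hj'

theorem pvPass_nochange (D : PySem.Dict (List Char) Int)
    (h : (pvPass D).2 = false) :
    (pvPass D).1 = D ∧
      ∀ p ∈ D.items, ∀ i : Int, 1 ≤ i → i < (p.1.length : Int) - 1 → pvG p.1 i →
        ∃ e, D.get? (pvTgt p.1 i) = some e ∧ e ≤ p.2 + 1 := by
  have hgen : ∀ (L : List (List Char × Int)) (st : PySem.Dict (List Char) Int × Bool),
      (L.foldl pvPassStep st).2 = false →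
      L.foldl pvPassStep st = st ∧ st.2 = false ∧
        ∀ p ∈ L, ∀ i : Int, 1 ≤ i → i < (p.1.length : Int) - 1 → pvG p.1 i →
          ∃ e, st.1.get? (pvTgt p.1 i) = some e ∧ e ≤ p.2 + 1 := by
    intro L
    induction L with
    | nil => intro st h; exact ⟨rfl, h, by simp⟩
    | cons p L ih =>
      intro st h
      simp only [List.foldl_cons] at h ⊢
      obtain ⟨heq, hflag, hcl⟩ := ih (pvPassStep st p) h
      have hbnds : ∀ i ∈ PySem.List.pyRange 1 (PySem.List.len p.1 - 1) 1,
          1 ≤ i ∧ i < (p.1.length : Int) - 1 := by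
        intro i hi
        rw [PySem.List.len_eq] at hi
        exact PySem.List.mem_pyRange_one.mp hi
      obtain ⟨heq0, hflag0, hcl0⟩ := pvFoldR_nochange p.1 p.2 _ hbnds st hflag
      rw [show pvPassStep st p =
        (PySem.List.pyRange 1 (PySem.List.len p.1 - 1) 1).foldl (pvRelaxI p.1 p.2) st
        from rfl, heq0] at heq hcl ⊢
      refine ⟨heq, hflag0, ?_⟩
      intro q hq i hi1 hi2 hG
      rcases List.mem_cons.mp hq with hq' | hq'
      · subst hq'
        refine hcl0 i ?_ hG
        rw [PySem.List.len_eq]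
        exact PySem.List.mem_pyRange_one.mpr ⟨hi1, by omega⟩
      · exact hcl q hq' i hi1 hi2 hG
  obtain ⟨heq, _, hcl⟩ := hgen D.items (D, false) h
  exact ⟨by rw [show (pvPass D) = D.items.foldl pvPassStep (D, false) from rfl, heq],
    fun p hp => hcl p hp⟩

theorem pvFix_upper (src : List Char) (D : PySem.Dict (List Char) Int)
    (hsrc : D.get? src = some 0)
    (hcl : ∀ p ∈ D.items, ∀ i : Int, 1 ≤ i → i < (p.1.length : Int) - 1 → pvG p.1 i →
      ∃ e, D.get? (pvTgt p.1 i) = some e ∧ e ≤ p.2 + 1) :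
    ∀ (nn : Nat) (x : List Char), pvReachF src nn x →
      ∃ e, D.get? x = some e ∧ e ≤ (nn : Int) := by
  intro nn
  induction nn with
  | zero =>
    intro x hx
    rw [show x = src from hx]
    exact ⟨0, hsrc, by omega⟩
  | succ nn ih =>
    intro x hx
    obtain ⟨u, hu, i, hi1, hi2, hg, hxt⟩ := hx
    obtain ⟨e, he, hle⟩ := ih u hu
    have hmem : (u, e) ∈ D.items := PySem.Dict.mem_items_of_get?_eq_some D he
    obtain ⟨e2, he2, hle2⟩ := hcl (u, e) hmem i hi1 hi2 hg
    refine ⟨e2, hxt ▸ he2, by push_cast; omega⟩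

theorem pvRelaxMain (src target : List Char) (A : Finset Char) (n : Nat) :
    ∀ (m : Nat) (D : PySem.Dict (List Char) Int) (h : pvInvR A n D),
      pvNu A n D ≤ m → pvInv2 src D →
      pvLoopR target A n D h = pvDres src target := by
  intro m
  induction m using Nat.strong_induction_on with
  | _ m ih =>
    intro D h hm h2
    rw [pvLoopR]
    by_cases hc : (pvPass D).2 = true
    · rw [dif_pos hc]
      have hdec := pvPass_dec A n D h hc
      exact ih (pvNu A n (pvPass D).1) (by omega) (pvPass D).1 (pvPass_inv A n D h)
        (le_refl _) (pvPass_inv2 src D h2)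
    · rw [dif_neg hc]
      have hc' : (pvPass D).2 = false := by simpa using hc
      obtain ⟨hDeq, hcl⟩ := pvPass_nochange D hc'
      rw [hDeq, PySem.Dict.getD_eq_get?_getD]
      cases hg : D.get? target with
      | none =>
        have hres : pvDres src target = -1 := by
          unfold pvDres
          haveI := Classical.propDecidable (∃ m', pvReachF src m' target)
          rw [if_neg]
          rintro ⟨nn, hR⟩
          obtain ⟨e, he, _⟩ := pvFix_upper src D h2.1 hcl nn target hR
          rw [hg] at he
          cases he
        rw [hres]
        rfl
      | some e =>
        have h0R := h2.2 (target, e) (PySem.Dict.mem_items_of_get?_eq_some D hg)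
        have hex : ∃ mm, pvReachF src mm target := ⟨e.toNat, h0R.2⟩
        have hne : {mm | pvReachF src mm target}.Nonempty := hex
        obtain ⟨e', he', hle'⟩ :=
          pvFix_upper src D h2.1 hcl (sInf {mm | pvReachF src mm target}) target
            (Nat.sInf_mem hne)
        have hee : e' = e := (Option.some.inj (hg.symm.trans he')).symm
        have hle2 : sInf {mm | pvReachF src mm target} ≤ e.toNat :=
          Nat.sInf_le h0R.2
        have hres : pvDres src target =
            ((sInf {mm | pvReachF src mm target} : Nat) : Int) := by
          unfold pvDres
          haveI := Classical.propDecidable (∃ m', pvReachF src m' target)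
          rw [if_pos hex]
        rw [hres]
        have h0e : 0 ≤ e := h0R.1
        simp only [Option.getD_some]
        omega

-- ===== VERDICT (by name: the statement is the Claim_ definition above) =====
theorem bfs_spec : Claim_equal_bfs := by
  unfold Claim_equal_bfs Spec_bfs
  intro src target _
  have hA : bfs src target =
      pvLoopB target.toList (pvAlpha src.toList) src.toList.length
        ((∅ : Std.HashSet (List Char)).insert src.toList) [src.toList] 0
        (pvInitB src.toList) := by
    unfold bfs
    apply pvMain _ _ _ (2 * (pvAllLists (pvAlpha src.toList) src.toList.length).card + 1)
    · have hlen : ((∅ : Std.HashMap (List Char) Int).insert src.toList 0).size = 1 := by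
        rw [Std.HashMap.size_insert, if_neg (Std.HashMap.not_mem_empty),
          Std.HashMap.size_empty]
      rw [hlen]
      simp only [List.length_cons, List.length_nil]
      omega
    · intro t
      rw [Std.HashMap.contains_insert, Std.HashSet.contains_insert,
        Std.HashMap.contains_empty, Std.HashSet.contains_empty]
    · intro t ht
      simp at ht
      rw [ht]
      exact Std.HashMap.getElem?_insert_self
  have hL : pvLoopB target.toList (pvAlpha src.toList) src.toList.length
      ((∅ : Std.HashSet (List Char)).insert src.toList) [src.toList] 0
      (pvInitB src.toList) = pvDres src.toList target.toList := by
    have h0 : (0 : Int) = ((0 : Nat) : Int) := rfl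
    rw [h0]
    apply pvLevelMain src.toList target.toList _ _
      (2 * (pvAllLists (pvAlpha src.toList) src.toList.length).card + 1) 0
    · have hlen : ((∅ : Std.HashSet (List Char)).insert src.toList).size = 1 := by
        rw [Std.HashSet.size_insert, if_neg Std.HashSet.not_mem_empty]
        simp
      rw [hlen]
      simp only [List.length_cons, List.length_nil]
      omega
    · intro x
      constructor
      · intro hx
        rcases Std.HashSet.mem_insert.mp hx with h' | h'
        · exact ⟨0, le_refl 0, (beq_iff_eq.mp h').symm⟩
        · exact absurd h' Std.HashSet.not_mem_empty
      · rintro ⟨mm, hmm, hR⟩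
        have hm0 : mm = 0 := by omega
        subst hm0
        rw [show x = src.toList from hR]
        exact Std.HashSet.mem_insert.mpr (Or.inl (by simp))
    · intro x
      constructor
      · intro hx
        simp at hx
        subst hx
        exact ⟨⟨0, le_refl 0, rfl⟩, fun mm hmm => absurd hmm (by omega)⟩
      · rintro ⟨⟨mm, hmm, hR⟩, _⟩
        have hm0 : mm = 0 := by omega
        subst hm0
        simp [show x = src.toList from hR]
    · intro j hj
      exact absurd hj (by omega)
  have hB : bfs_alt src target = pvDres src.toList target.toList := by
    unfold bfs_alt
    apply pvRelaxMain src.toList target.toList _ _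
      (pvNu (pvAlpha src.toList) src.toList.length
        ((PySem.Dict.empty : PySem.Dict (List Char) Int).insert src.toList 0))
      _ _ (le_refl _)
    have hitems : ((PySem.Dict.empty : PySem.Dict (List Char) Int).insert src.toList 0).items
        = [(src.toList, 0)] := by
      rw [PySem.Dict.items_insert_of_not_contains _ _ (by simp [PySem.Dict.contains_empty])]
      rfl
    refine ⟨PySem.Dict.get?_insert_self _ _ _, ?_⟩
    intro p hp
    rw [hitems] at hp
    simp at hp
    rw [hp]
    exact ⟨by omega, rfl⟩
  rw [hA, hL, hB]
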